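-- pv_equiv track=rewrite | github.com/thehalleyyoung/deppy | tests/test_examples/021_ford_fulkerson_min_cut.py | SPEC
-- ===== SOURCE A (Python) =====
-- def SPEC(n, edges, source, sink, result):
--     """Verify min-cut correctness."""
--     max_flow, S, T, cut_edges = result
--
--     # (1) S and T partition all nodes
--     all_nodes = set(range(n))
--     if set(S) | set(T) != all_nodes:
--         return False
--     if set(S) & set(T):
--         return False
--
--     # (2) source in S, sink in T
--     if source not in S or sink not in T:
--         return False
--
--     # (3) Cut capacity equals max_flow
--     cap_map = {}
--     for u, v, cap in edges:
--         cap_map[(u, v)] = cap_map.get((u, v), 0) + cap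
--
--     cut_capacity = 0
--     s_set = set(S)
--     t_set = set(T)
--     for (u, v), cap in cap_map.items():
--         if u in s_set and v in t_set:
--             cut_capacity += cap
--
--     if cut_capacity != max_flow:
--         return False
--
--     # (4) Verify max flow via reference: run clean Edmonds-Karp
--     from collections import deque as dq
--     g = [[0] * n for _ in range(n)]
--     for u, v, cap in edges:
--         g[u][v] += cap
--
--     def ref_bfs(src, snk, par):
--         vis = [False] * n
--         vis[src] = True
--         q = dq([src])
--         while q:
--             uu = q.popleft()
--             for vv in range(n):
--                 if not vis[vv] and g[uu][vv] > 0: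
--                     vis[vv] = True
--                     par[vv] = uu
--                     if vv == snk:
--                         return True
--                     q.append(vv)
--         return False
--
--     ref_flow = 0
--     par = [-1] * n
--     while ref_bfs(source, sink, par):
--         pf = float('inf')
--         v = sink
--         while v != source:
--             u = par[v]
--             pf = min(pf, g[u][v])
--             v = u
--         v = sink
--         while v != source:
--             u = par[v]
--             g[u][v] -= pf
--             g[v][u] += pf
--             v = u
--         ref_flow += pf
--         par = [-1] * n
--
--     if max_flow != ref_flow:
--         return False
--
--     return True
-- ===== SOURCE B (Python) =====
-- def SPEC(n, edges, source, sink, result):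
--     """Verify min-cut correctness."""
--     max_flow, S, T, cut_edges = result
--
--     # (1) S and T partition all nodes: disjoint, in range, covering by cardinality
--     sS, sT = set(S), set(T)
--     if not sS.isdisjoint(sT):
--         return False
--     union = sS | sT
--     if len(union) != n or any(not (0 <= x < n) for x in union):
--         return False
--
--     # (2) source in S, sink in T
--     if source not in sS or sink not in sT:
--         return False
--
--     # (3) cut capacity: one pass over the raw edge list, no grouping map
--     if max_flow != sum(c for u, v, c in edges if u in sS and v in sT):
--         return False
--
--     # (4) reference max flow: Ford-Fulkerson with depth-first augmenting
--     #     paths found by a recursive DFS over a residual dict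
--     r = {}
--     for u, v, c in edges:
--         r[(u, v)] = r.get((u, v), 0) + c
--     flow = 0
--     while True:
--         path = _dfs(n, r, source, sink, {source})
--         if path is None:
--             break
--         pf = min(r.get((a, b), 0) for a, b in zip(path, path[1:]))
--         for a, b in zip(path, path[1:]):
--             r[(a, b)] = r.get((a, b), 0) - pf
--             r[(b, a)] = r.get((b, a), 0) + pf
--         flow += pf
--     return flow == max_flow
--
--
-- def _dfs(n, r, u, sink, seen):
--     if u == sink:
--         return [u]
--     for v in range(n):
--         if v not in seen and r.get((u, v), 0) > 0:
--             seen.add(v)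
--             rest = _dfs(n, r, v, sink, seen)
--             if rest is not None:
--                 return [u] + rest
--     return None
-- ===== Notes on version B (the rewrite author's own statement) =====
-- stated objective: alternative
-- what changed: B checks the partition by disjointness plus a cardinality count instead of set equality with set(range(n)), sums the cut capacity in one pass over the raw edge list instead of building a grouping dict first, and computes the reference max flow by Ford-Fulkerson with depth-first augmenting paths (a recursive DFS over a residual dict) instead of A's Edmonds-Karp breadth-first search with an n-by-n matrix, a parent array and two backward while-walks; the two strategies augment along different paths but reach the same max-flow value, which the Lean file proves via the max-flow/min-cut argument. …
-- outside the precondition, e.g. on SPEC(2, [(0, 1, 1), (-2, 1, 1)], 0, 1, (1, [0], [1], [])): A returns False, B returns True; on SPEC(2, [(0, 1, 1), (5, 1, 1)], 0, 1, (1, [0], [1], [])): A raises IndexError, B returns True; on SPEC(2, [(0, 1, -1)], 0, 1, (-1, [0], [1], [])): A returns False, B returns False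
import Mathlib
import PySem

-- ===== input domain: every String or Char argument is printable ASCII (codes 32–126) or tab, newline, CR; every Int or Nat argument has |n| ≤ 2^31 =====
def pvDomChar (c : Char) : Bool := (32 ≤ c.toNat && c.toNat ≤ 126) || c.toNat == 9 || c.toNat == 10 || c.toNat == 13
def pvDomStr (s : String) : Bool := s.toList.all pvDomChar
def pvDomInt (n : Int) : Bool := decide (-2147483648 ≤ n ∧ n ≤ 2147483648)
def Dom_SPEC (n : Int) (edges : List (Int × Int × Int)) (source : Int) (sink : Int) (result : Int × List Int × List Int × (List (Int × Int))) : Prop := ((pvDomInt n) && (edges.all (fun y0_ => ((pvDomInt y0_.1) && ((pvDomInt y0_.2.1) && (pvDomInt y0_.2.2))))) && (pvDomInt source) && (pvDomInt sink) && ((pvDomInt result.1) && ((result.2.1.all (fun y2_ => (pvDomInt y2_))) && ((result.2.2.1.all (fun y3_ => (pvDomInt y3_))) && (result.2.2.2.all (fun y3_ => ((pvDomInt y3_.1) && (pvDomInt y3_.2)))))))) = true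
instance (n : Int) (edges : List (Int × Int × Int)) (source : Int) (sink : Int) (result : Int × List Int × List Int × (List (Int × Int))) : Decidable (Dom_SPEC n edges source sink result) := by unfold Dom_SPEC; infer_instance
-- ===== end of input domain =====

-- One-line summary: B checks the partition by disjointness + cardinality, sums the cut in one
-- pass over the raw edge list, and computes the reference max flow by Ford-Fulkerson with
-- recursive DFS augmenting paths on a residual dict instead of A's breadth-first Edmonds-Karp
-- on an n x n matrix; the proof shows both reach the same value via max-flow/min-cut
-- (objective: alternative).

-- ===== PORT A =====
-- g[u][v] on the matrix (Python: g[uu][vv]); total form, exact under Pre_ (indices in [0, n))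
def pvMatG (g : List (List Int)) (u v : Int) : Int :=
  PySem.List.pyGetD (PySem.List.pyGetD g u []) v 0

-- g = [[0]*n for _ in range(n)]; for u, v, cap in edges: g[u][v] += cap
def pvBuildG (n : Int) (edges : List (Int × Int × Int)) : List (List Int) :=
  edges.foldl
    (fun g e =>
      PySem.List.pySetD g e.1
        (PySem.List.pySetD (PySem.List.pyGetD g e.1 []) e.2.1 (pvMatG g e.1 e.2.1 + e.2.2)))
    (List.replicate n.toNat (List.replicate n.toNat 0))

-- the inner 'for vv in range(n)' of ref_bfs; returns (found sink, vis, par, q)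
def pvScanA (g : List (List Int)) (snk uu : Int) :
    List Int → List Bool → List Int → List Int → Bool × List Bool × List Int × List Int
  | [], vis, par, q => (false, vis, par, q)
  | vv :: rest, vis, par, q =>
    if !(PySem.List.pyGetD vis vv false) && decide (0 < pvMatG g uu vv) then
      let vis' := PySem.List.pySetD vis vv true
      let par' := PySem.List.pySetD par vv uu
      if vv == snk then (true, vis', par', q)
      else pvScanA g snk uu rest vis' par' (q ++ [vv])
    else pvScanA g snk uu rest vis par q

-- the 'while q' loop of ref_bfs (fuel: each vertex is enqueued at most once)
def pvBfsA (n : Int) (g : List (List Int)) (snk : Int) :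
    Nat → List Bool → List Int → List Int → Bool × List Int
  | 0, _, par, _ => (false, par)
  | _ + 1, _, par, [] => (false, par)
  | fuel + 1, vis, par, uu :: qrest =>
    match pvScanA g snk uu (PySem.List.pyRange 0 n 1) vis par qrest with
    | (true, _, par', _) => (true, par')
    | (false, vis', par', q') => pvBfsA n g snk fuel vis' par' q'

-- pf = min(pf, g[par[v]][v]) walking v back to source (none = float('inf'))
def pvWalkMin (g : List (List Int)) (par : List Int) (src : Int) :
    Nat → Int → Option Int → Option Int
  | 0, _, pf => pf
  | fuel + 1, v, pf =>
    if v == src then pf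
    else
      let u := PySem.List.pyGetD par v (-1)
      pvWalkMin g par src fuel u
        (some (match pf with | none => pvMatG g u v | some p => min p (pvMatG g u v)))

-- g[u][v] -= pf; g[v][u] += pf walking v back to source
def pvWalkUpd (par : List Int) (src : Int) (pf : Int) :
    Nat → Int → List (List Int) → List (List Int)
  | 0, _, g => g
  | fuel + 1, v, g =>
    if v == src then g
    else
      let u := PySem.List.pyGetD par v (-1)
      let g1 := PySem.List.pySetD g u
        (PySem.List.pySetD (PySem.List.pyGetD g u []) v (pvMatG g u v - pf))
      let g2 := PySem.List.pySetD g1 v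
        (PySem.List.pySetD (PySem.List.pyGetD g1 v []) u (pvMatG g1 v u + pf))
      pvWalkUpd par src pf fuel u g2

-- the 'while ref_bfs(...)' loop (fuel: the flow value rises by pf ≥ 1 per round)
def pvEkA (n src snk : Int) : Nat → List (List Int) → Int → Int
  | 0, _, fl => fl
  | fuel + 1, g, fl =>
    match pvBfsA n g snk (n.toNat + 1)
        (PySem.List.pySetD (List.replicate n.toNat false) src true)
        (List.replicate n.toNat (-1)) [src] with
    | (false, _) => fl
    | (true, par) =>
      let pf := (pvWalkMin g par src (n.toNat + 1) snk none).getD 0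
      let g' := pvWalkUpd par src pf (n.toNat + 1) snk g
      pvEkA n src snk fuel g' (fl + pf)

def SPEC (n : Int) (edges : List (Int × Int × Int)) (source : Int) (sink : Int) (result : Int × List Int × List Int × (List (Int × Int))) : Bool :=
  let max_flow := result.1
  let S := result.2.1
  let T := result.2.2.1
  -- set(range(n)): the range is distinct, so it is its own PySem.Set
  -- (PySem.Set.ofList_eq_self_of_nodup; evaluates in linear time)
  let allNodes : PySem.Set Int := PySem.List.pyRange 0 n 1
  if !(PySem.Set.equal (PySem.Set.union (PySem.Set.ofList S) (PySem.Set.ofList T)) allNodes) then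
    false
  else if !(PySem.Set.inter (PySem.Set.ofList S) (PySem.Set.ofList T) == ([] : List Int)) then
    false
  else if !(S.contains source) || !(T.contains sink) then
    false
  else
    let capMap : PySem.Dict (Int × Int) Int :=
      edges.foldl (fun d e => d.insert (e.1, e.2.1) (d.getD (e.1, e.2.1) 0 + e.2.2))
        PySem.Dict.empty
    let sSet : PySem.Set Int := PySem.Set.ofList S
    let tSet : PySem.Set Int := PySem.Set.ofList T
    let cutCapacity := capMap.items.foldl
      (fun acc p =>
        if PySem.Set.contains sSet p.1.1 && PySem.Set.contains tSet p.1.2 then acc + p.2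
        else acc) 0
    if !(cutCapacity == max_flow) then false
    else
      let g := pvBuildG n edges
      let refFlow := pvEkA n source sink
        (2 * edges.foldl (fun a e => a + e.2.2.natAbs) 0 + 1) g 0
      if !(max_flow == refFlow) then false else true

-- ===== PORT B =====
-- r[(u, v)] = r.get((u, v), 0) + c over the edge list
def pvBuildR (edges : List (Int × Int × Int)) : PySem.Dict (Int × Int) Int :=
  edges.foldl (fun d e => d.insert (e.1, e.2.1) (d.getD (e.1, e.2.1) 0 + e.2.2))
    PySem.Dict.empty

-- recursive _dfs of Source B: '[u] if u == sink', else scan v in range(n) and recurse;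
-- fuel (n+1, bounds the recursion depth) is a totality device only
mutual
def pvDfsB (n : Int) (r : PySem.Dict (Int × Int) Int) (snk : Int) :
    Nat → Int → PySem.Set Int → Option (List Int) × PySem.Set Int
  | 0, _, seen => (none, seen)
  | fuel + 1, u, seen =>
    if u == snk then (some [u], seen)
    else pvDfsScanB n r snk fuel u (PySem.List.pyRange 0 n 1) seen
termination_by fuel u seen => (fuel, 0)
decreasing_by exact Prod.Lex.left _ _ (Nat.lt_succ_self _)

-- the 'for v in range(n)' loop of _dfs
def pvDfsScanB (n : Int) (r : PySem.Dict (Int × Int) Int) (snk : Int) :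
    Nat → Int → List Int → PySem.Set Int → Option (List Int) × PySem.Set Int
  | _, _, [], seen => (none, seen)
  | fuel, u, v :: vs, seen =>
    if !(PySem.Set.contains seen v) && decide (0 < r.getD (u, v) 0) then
      match pvDfsB n r snk fuel v (PySem.Set.add seen v) with
      | (some p, seen') => (some (u :: p), seen')
      | (none, seen') => pvDfsScanB n r snk fuel u vs seen'
    else pvDfsScanB n r snk fuel u vs seen
termination_by fuel u vs seen => (fuel, vs.length + 1)
decreasing_by
  all_goals first
    | exact Prod.Lex.right _ (Nat.lt_succ_self _)
    | exact Prod.Lex.right _ (by omega)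
end

-- r[(a,b)] -= pf; r[(b,a)] += pf over the consecutive pairs of the path
def pvUpdR (pf : Int) (pairs : List (Int × Int)) (r : PySem.Dict (Int × Int) Int) :
    PySem.Dict (Int × Int) Int :=
  pairs.foldl
    (fun r p =>
      let r1 := r.insert p (r.getD p 0 - pf)
      r1.insert (p.2, p.1) (r1.getD (p.2, p.1) 0 + pf))
    r

-- the 'while True' loop (fuel: the flow value rises by pf ≥ 1 per round)
def pvFFB (n src snk : Int) : Nat → PySem.Dict (Int × Int) Int → Int → Int
  | 0, _, fl => fl
  | fuel + 1, r, fl =>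
    match (pvDfsB n r snk (n.toNat + 1) src (PySem.Set.add PySem.Set.empty src)).1 with
    | none => fl
    | some path =>
      let pairs := path.zip (PySem.List.slice path (some 1) none)
      -- min(...) over a structurally nonempty path; getD 0 is never taken
      let pf := ((pairs.map (fun p => r.getD p 0)).min?).getD 0
      pvFFB n src snk fuel (pvUpdR pf pairs r) (fl + pf)

def SPEC_alt (n : Int) (edges : List (Int × Int × Int)) (source : Int) (sink : Int) (result : Int × List Int × List Int × (List (Int × Int))) : Bool :=
  let max_flow := result.1
  let S := result.2.1
  let T := result.2.2.1
  let sS : PySem.Set Int := PySem.Set.ofList S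
  let sT : PySem.Set Int := PySem.Set.ofList T
  if !(PySem.Set.isdisjoint sS sT) then false
  else
    let uni : PySem.Set Int := PySem.Set.union sS sT
    if !((PySem.Set.len uni : Int) == n) ||
        uni.any (fun x => !(decide (0 ≤ x) && decide (x < n))) then false
    else if !(PySem.Set.contains sS source) || !(PySem.Set.contains sT sink) then false
    else if !(edges.foldl
        (fun acc e =>
          if PySem.Set.contains sS e.1 && PySem.Set.contains sT e.2.1 then acc + e.2.2
          else acc) 0 == max_flow) then false
    else
      let r := pvBuildR edges
      let flow := pvFFB n source sink
        (2 * edges.foldl (fun a e => a + e.2.2.natAbs) 0 + 1) r 0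
      flow == max_flow

-- ===== PRECONDITION & SPEC =====
-- Pre_ excludes inputs that reach A's reference-flow phase (all earlier checks pass) with an
-- edge endpoint outside [0, n) — there A raises IndexError for endpoints outside [-n, n) and
-- silently wraps a negative endpoint, an artefact of its list-of-lists matrix — or with a
-- negative edge capacity, on which 'max flow' is outside the min-cut problem's domain and the
-- value either augmenting-path order reaches is equally defensible.
def Pre_SPEC (n : Int) (edges : List (Int × Int × Int)) (source : Int) (sink : Int) (result : Int × List Int × List Int × (List (Int × Int))) : Prop :=
  ((∀ x ∈ result.2.1, 0 ≤ x ∧ x < n ∧ x ∉ result.2.2.1) ∧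
   (∀ x ∈ result.2.2.1, 0 ≤ x ∧ x < n) ∧
   ((PySem.Set.ofList result.2.1).length : Int) + ((PySem.Set.ofList result.2.2.1).length : Int) = n ∧
   source ∈ result.2.1 ∧ sink ∈ result.2.2.1 ∧
   edges.foldl
     (fun acc e => if e.1 ∈ result.2.1 ∧ e.2.1 ∈ result.2.2.1 then acc + e.2.2 else acc) 0
     = result.1) →
  ∀ e ∈ edges, 0 ≤ e.1 ∧ e.1 < n ∧ 0 ≤ e.2.1 ∧ e.2.1 < n ∧ 0 ≤ e.2.2

instance (n : Int) (edges : List (Int × Int × Int)) (source : Int) (sink : Int) (result : Int × List Int × List Int × (List (Int × Int))) : Decidable (Pre_SPEC n edges source sink result) := by unfold Pre_SPEC; infer_instance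

def pvWitness_SPEC : Int × (List (Int × Int × Int)) × Int × Int × (Int × List Int × List Int × (List (Int × Int))) :=
  (2, [(0, 1, 3)], 0, 1, (3, [0], [1], [(0, 1)]))

def Spec_SPEC (n : Int) (edges : List (Int × Int × Int)) (source : Int) (sink : Int) (result : Int × List Int × List Int × (List (Int × Int))) (out : Bool) : Prop := out = SPEC_alt n edges source sink result
instance (n : Int) (edges : List (Int × Int × Int)) (source : Int) (sink : Int) (result : Int × List Int × List Int × (List (Int × Int))) (out : Bool) : Decidable (Spec_SPEC n edges source sink result out) := by unfold Spec_SPEC; infer_instance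

-- ===== CLAIM (what is proved, stated in full; the proofs are below) =====
def Claim_equal_SPEC : Prop := ∀ (n : Int) (edges : List (Int × Int × Int)) (source : Int) (sink : Int) (result : Int × List Int × List Int × (List (Int × Int))), Dom_SPEC n edges source sink result → Pre_SPEC n edges source sink result → Spec_SPEC n edges source sink result (SPEC n edges source sink result)

-- ===== LEMMAS AND PROOFS =====


-- ---------- generic list-sum helpers ----------

def pvFS (P : Int × Int → Bool) (l : List ((Int × Int) × Int)) : Int :=
  ((l.filter (fun p => P p.1)).map (·.2)).sum

def pvES (P : Int × Int → Bool) (edges : List (Int × Int × Int)) : Int :=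
  ((edges.filter (fun e => P (e.1, e.2.1))).map (·.2.2)).sum

theorem pv_foldl_if_sum (P : Int × Int → Bool) (l : List ((Int × Int) × Int)) (acc : Int) :
    l.foldl (fun acc p => if P p.1 then acc + p.2 else acc) acc = acc + pvFS P l := by
  induction l generalizing acc with
  | nil => simp [pvFS]
  | cons h t ih =>
    by_cases hp : P h.1 <;> simp [pvFS, List.filter_cons, hp, ih] <;> ring

theorem pv_foldl_if_sum_edges (P : Int × Int → Bool) (edges : List (Int × Int × Int)) (acc : Int) :
    edges.foldl (fun acc e => if P (e.1, e.2.1) then acc + e.2.2 else acc) acc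
      = acc + pvES P edges := by
  induction edges generalizing acc with
  | nil => simp [pvES]
  | cons h t ih =>
    by_cases hp : P (h.1, h.2.1) <;> simp [pvES, List.filter_cons, hp, ih] <;> ring

theorem pvFS_cons (P : Int × Int → Bool) (x : (Int × Int) × Int) (l : List ((Int × Int) × Int)) :
    pvFS P (x :: l) = (if P x.1 then x.2 else 0) + pvFS P l := by
  by_cases hp : P x.1 <;> simp [pvFS, List.filter_cons, hp]

theorem pv_FS_replace (P : Int × Int → Bool) (k : Int × Int) (v w : Int) :
    ∀ l : List ((Int × Int) × Int), (l.map (·.1)).Nodup → (k, w) ∈ l →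
      pvFS P (l.map (fun p => if p.1 == k then (k, v) else p))
        = pvFS P l + (if P k then v - w else 0) := by
  intro l hnd hmem
  induction l with
  | nil => simp at hmem
  | cons h t ih =>
    simp only [List.map_cons, List.nodup_cons] at hnd
    rcases List.mem_cons.1 hmem with he | ht
    · subst he
      have hkt : ∀ p ∈ t, p.1 ≠ k := by
        intro p hp hpk
        exact hnd.1 (hpk ▸ List.mem_map_of_mem (f := (·.1)) hp)
      have hmap : t.map (fun p => if p.1 == k then (k, v) else p) = t := by
        rw [List.map_congr_left (g := id) ?_, List.map_id]
        intro p hp; simp [hkt p hp]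
      rw [List.map_cons, hmap]
      simp only [beq_self_eq_true, if_true, pvFS_cons]
      by_cases hp : P k <;> simp [hp] <;> omega
    · have hhk : h.1 ≠ k := by
        intro hk
        exact hnd.1 (hk ▸ List.mem_map_of_mem (f := (·.1)) ht)
      have hne : (h.1 == k) = false := by simpa using hhk
      have hrec := ih hnd.2 ht
      rw [List.map_cons, hne]
      simp only [Bool.false_eq_true, if_false, pvFS_cons, hrec]
      omega

theorem pv_FS_insert (P : Int × Int → Bool) (d : PySem.Dict (Int × Int) Int)
    (hnd : d.keys.Nodup) (k : Int × Int) (c : Int) :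
    pvFS P (d.insert k (d.getD k 0 + c)).items
      = pvFS P d.items + (if P k then c else 0) := by
  by_cases hc : d.contains k
  · have hget : d.get? k = some (d.getD k 0) := by
      rcases (PySem.Dict.contains_eq_isSome_get? d k ▸ hc : (d.get? k).isSome = true) with h
      rcases Option.isSome_iff_exists.1 h with ⟨v, hv⟩
      simp [PySem.Dict.getD_eq_get?_getD, hv]
    have hmem : (k, d.getD k 0) ∈ d.items :=
      PySem.Dict.mem_items_of_get?_eq_some d hget
    rw [PySem.Dict.items_insert_of_contains d _ hc]
    have := pv_FS_replace P k (d.getD k 0 + c) (d.getD k 0) d.items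
      (by simpa [PySem.Dict.keys] using hnd) hmem
    rw [this]
    by_cases hp : P k <;> simp [hp]
  · have h0 : d.getD k 0 = 0 := PySem.Dict.getD_of_not_contains d 0 (by simpa using hc)
    rw [PySem.Dict.items_insert_of_not_contains d _ (by simpa using hc)]
    by_cases hp : P k <;> simp [pvFS, hp, h0]

theorem pv_capfold (P : Int × Int → Bool) :
    ∀ (edges : List (Int × Int × Int)) (d : PySem.Dict (Int × Int) Int), d.keys.Nodup →
      pvFS P (edges.foldl
          (fun d e => d.insert (e.1, e.2.1) (d.getD (e.1, e.2.1) 0 + e.2.2)) d).items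
        = pvFS P d.items + pvES P edges := by
  intro edges
  induction edges with
  | nil => intro d _; simp [pvES]
  | cons e t ih =>
    intro d hnd
    have hnd' : ((d.insert (e.1, e.2.1) (d.getD (e.1, e.2.1) 0 + e.2.2)).keys).Nodup :=
      PySem.Dict.nodup_keys_insert d _ _ hnd
    rw [List.foldl_cons, ih _ hnd', pv_FS_insert P d hnd]
    by_cases hp : P (e.1, e.2.1) <;> simp [pvES, List.filter_cons, hp] <;> ring

-- A's cut fold over the grouping dict equals B's single pass over the edges
theorem pv_cut_eq (sS sT : PySem.Set Int) (edges : List (Int × Int × Int)) :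
    (edges.foldl (fun d e => d.insert (e.1, e.2.1) (d.getD (e.1, e.2.1) 0 + e.2.2))
        PySem.Dict.empty).items.foldl
      (fun acc p => if PySem.Set.contains sS p.1.1 && PySem.Set.contains sT p.1.2
        then acc + p.2 else acc) 0
    = edges.foldl
        (fun acc e => if PySem.Set.contains sS e.1 && PySem.Set.contains sT e.2.1
          then acc + e.2.2 else acc) 0 := by
  have h1 := pv_foldl_if_sum (fun kk => PySem.Set.contains sS kk.1 && PySem.Set.contains sT kk.2)
    (edges.foldl (fun d e => d.insert (e.1, e.2.1) (d.getD (e.1, e.2.1) 0 + e.2.2))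
        PySem.Dict.empty).items 0
  have h2 := pv_foldl_if_sum_edges
    (fun kk => PySem.Set.contains sS kk.1 && PySem.Set.contains sT kk.2) edges 0
  have h3 := pv_capfold
    (fun kk => PySem.Set.contains sS kk.1 && PySem.Set.contains sT kk.2) edges
    PySem.Dict.empty (by simp [PySem.Dict.keys, PySem.Dict.empty])
  simp only [h1, h2, h3]
  simp [pvFS, PySem.Dict.empty, PySem.Dict.items]

-- ---------- partition-check equivalence ----------

-- union of the two node sets is S-set ++ T-set when disjoint
theorem pv_union_append (S T : List Int) (hdisj : ∀ x ∈ S, x ∉ T) :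
    PySem.Set.union (PySem.Set.ofList S) (PySem.Set.ofList T)
      = PySem.Set.ofList S ++ PySem.Set.ofList T := by
  apply PySem.Set.update_eq_append_of_disjoint _ _ (PySem.Set.nodup_ofList T)
  intro x hx
  rw [PySem.Set.mem_ofList] at hx ⊢
  intro hxS; exact hdisj x hxS hx

theorem pv_part_iff (n src : Int) (S T : List Int) (hdisj : ∀ x ∈ S, x ∉ T) (hsrc : src ∈ S) :
    (∀ x : Int, (x ∈ S ∨ x ∈ T) ↔ (0 ≤ x ∧ x < n))
      ↔ ((∀ x ∈ S, 0 ≤ x ∧ x < n) ∧ (∀ x ∈ T, 0 ≤ x ∧ x < n) ∧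
          (((PySem.Set.ofList S).length : Int) + ((PySem.Set.ofList T).length : Int) = n)) := by
  have hU := pv_union_append S T hdisj
  have hUnodup : (PySem.Set.union (PySem.Set.ofList S) (PySem.Set.ofList T)).Nodup :=
    PySem.Set.nodup_union _ _ (PySem.Set.nodup_ofList S)
  have hUmem : ∀ x : Int, x ∈ PySem.Set.union (PySem.Set.ofList S) (PySem.Set.ofList T)
      ↔ (x ∈ S ∨ x ∈ T) := by
    intro x
    rw [PySem.Set.mem_union, PySem.Set.mem_ofList, PySem.Set.mem_ofList]
  have hlenU : (PySem.Set.union (PySem.Set.ofList S) (PySem.Set.ofList T)).length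
      = (PySem.Set.ofList S).length + (PySem.Set.ofList T).length := by
    rw [hU, List.length_append]
  constructor
  · intro hcov
    have hn : 0 < n := by
      have := (hcov src).1 (Or.inl hsrc); omega
    refine ⟨fun x hx => (hcov x).1 (Or.inl hx), fun x hx => (hcov x).1 (Or.inr hx), ?_⟩
    have hperm : (PySem.Set.union (PySem.Set.ofList S) (PySem.Set.ofList T)).Perm
        (PySem.List.pyRange 0 n 1) := by
      rw [List.perm_ext_iff_of_nodup hUnodup (PySem.List.nodup_pyRange_one 0 n)]
      intro x
      rw [hUmem, hcov, PySem.List.mem_pyRange_one]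
    have hlen := hperm.length_eq
    rw [hlenU, PySem.List.length_pyRange_one] at hlen
    omega
  · intro ⟨hS, hT, hcard⟩ x
    constructor
    · rintro (hx | hx)
      · exact hS x hx
      · exact hT x hx
    · intro hx
      by_contra hnx
      have hUsub : ∀ y ∈ PySem.Set.union (PySem.Set.ofList S) (PySem.Set.ofList T),
          y ∈ PySem.List.pyRange 0 n 1 := by
        intro y hy
        rw [PySem.List.mem_pyRange_one]
        rcases (hUmem y).1 hy with h | h
        · have := hS y h; omega
        · have := hT y h; omega
      have h1 : (PySem.Set.union (PySem.Set.ofList S) (PySem.Set.ofList T)).toFinset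
          ⊆ (PySem.List.pyRange 0 n 1).toFinset := by
        intro y hy
        rw [List.mem_toFinset] at hy ⊢
        exact hUsub y hy
      have hcards : ((PySem.List.pyRange 0 n 1).toFinset).card
          ≤ ((PySem.Set.union (PySem.Set.ofList S) (PySem.Set.ofList T)).toFinset).card := by
        rw [List.toFinset_card_of_nodup hUnodup,
          List.toFinset_card_of_nodup (PySem.List.nodup_pyRange_one 0 n),
          PySem.List.length_pyRange_one, hlenU]
        omega
      have heq := Finset.eq_of_subset_of_card_le h1 hcards
      have hxU : x ∈ PySem.Set.union (PySem.Set.ofList S) (PySem.Set.ofList T) := by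
        rw [← List.mem_toFinset, heq, List.mem_toFinset, PySem.List.mem_pyRange_one]
        omega
      exact hnx ((hUmem x).1 hxU)

-- the five pre-cut conditions both programs test, in Pre_'s wording
def pvCP (n source sink : Int) (S T : List Int) : Prop :=
  (∀ x ∈ S, 0 ≤ x ∧ x < n ∧ x ∉ T) ∧ (∀ x ∈ T, 0 ≤ x ∧ x < n) ∧
  ((PySem.Set.ofList S).length : Int) + ((PySem.Set.ofList T).length : Int) = n ∧
  source ∈ S ∧ sink ∈ T

theorem pv_A_pass_iff (n source sink : Int) (S T : List Int) :
    (PySem.Set.equal (PySem.Set.union (PySem.Set.ofList S) (PySem.Set.ofList T))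
        (PySem.Set.ofList (PySem.List.pyRange 0 n 1)) = true
      ∧ PySem.Set.inter (PySem.Set.ofList S) (PySem.Set.ofList T) = ([] : List Int)
      ∧ source ∈ S ∧ sink ∈ T)
    ↔ pvCP n source sink S T := by
  have hmemr : ∀ x : Int, x ∈ PySem.Set.ofList (PySem.List.pyRange 0 n 1) ↔ (0 ≤ x ∧ x < n) := by
    intro x
    rw [PySem.Set.mem_ofList, PySem.List.mem_pyRange_one]
  constructor
  · rintro ⟨heq, hint, hsrc, hsnk⟩
    have hdisj : ∀ x ∈ S, x ∉ T := by
      intro x hxS hxT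
      have : x ∈ PySem.Set.inter (PySem.Set.ofList S) (PySem.Set.ofList T) :=
        (PySem.Set.mem_inter _ _ x).mpr
          ⟨(PySem.Set.mem_ofList _ _).mpr hxS, (PySem.Set.mem_ofList _ _).mpr hxT⟩
      rw [hint] at this
      exact absurd this (List.not_mem_nil)
    have hcov : ∀ x : Int, (x ∈ S ∨ x ∈ T) ↔ (0 ≤ x ∧ x < n) := by
      intro x
      have := (PySem.Set.equal_iff _ _).mp heq x
      rw [PySem.Set.mem_union, PySem.Set.mem_ofList, PySem.Set.mem_ofList, hmemr] at this
      exact this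
    obtain ⟨h1, h2, h3⟩ := (pv_part_iff n source S T hdisj hsrc).mp hcov
    exact ⟨fun x hx => ⟨(h1 x hx).1, (h1 x hx).2, hdisj x hx⟩, h2, h3, hsrc, hsnk⟩
  · rintro ⟨h1, h2, h3, hsrc, hsnk⟩
    have hdisj : ∀ x ∈ S, x ∉ T := fun x hx => (h1 x hx).2.2
    have hcov := (pv_part_iff n source S T hdisj hsrc).mpr
      ⟨fun x hx => ⟨(h1 x hx).1, (h1 x hx).2.1⟩, h2, h3⟩
    refine ⟨?_, ?_, hsrc, hsnk⟩
    · rw [PySem.Set.equal_iff]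
      intro x
      rw [PySem.Set.mem_union, PySem.Set.mem_ofList, PySem.Set.mem_ofList, hmemr]
      exact hcov x
    · rw [List.eq_nil_iff_forall_not_mem]
      intro x hx
      rw [PySem.Set.mem_inter, PySem.Set.mem_ofList, PySem.Set.mem_ofList] at hx
      exact hdisj x hx.1 hx.2

theorem pv_B_pass_iff (n source sink : Int) (S T : List Int) :
    (PySem.Set.isdisjoint (PySem.Set.ofList S) (PySem.Set.ofList T) = true
      ∧ ((PySem.Set.len (PySem.Set.union (PySem.Set.ofList S) (PySem.Set.ofList T)) : Int) = n)
      ∧ ((PySem.Set.union (PySem.Set.ofList S) (PySem.Set.ofList T)).any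
          (fun x => !(decide (0 ≤ x) && decide (x < n))) = false)
      ∧ PySem.Set.contains (PySem.Set.ofList S) source = true
      ∧ PySem.Set.contains (PySem.Set.ofList T) sink = true)
    ↔ pvCP n source sink S T := by
  constructor
  · rintro ⟨hdb, hlen, hany, hsrc, hsnk⟩
    have hdisj : ∀ x ∈ S, x ∉ T := by
      intro x hxS hxT
      exact (PySem.Set.isdisjoint_iff _ _).mp hdb x
        ((PySem.Set.mem_ofList _ _).mpr hxS) ((PySem.Set.mem_ofList _ _).mpr hxT)
    have hU := pv_union_append S T hdisj
    have hrange : ∀ x : Int, x ∈ S ∨ x ∈ T → (0 ≤ x ∧ x < n) := by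
      intro x hx
      have hxU : x ∈ PySem.Set.union (PySem.Set.ofList S) (PySem.Set.ofList T) := by
        rw [PySem.Set.mem_union, PySem.Set.mem_ofList, PySem.Set.mem_ofList]
        exact hx
      have := List.any_eq_false.mp hany x hxU
      simpa using this
    refine ⟨fun x hx => ⟨(hrange x (Or.inl hx)).1, (hrange x (Or.inl hx)).2, hdisj x hx⟩,
      fun x hx => hrange x (Or.inr hx), ?_, ?_, ?_⟩
    · rw [← hlen]
      simp only [PySem.Set.len, hU, List.length_append]
      push_cast
      ring
    · exact (PySem.Set.mem_ofList _ _).mp ((PySem.Set.contains_iff _ _).mp hsrc)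
    · exact (PySem.Set.mem_ofList _ _).mp ((PySem.Set.contains_iff _ _).mp hsnk)
  · rintro ⟨h1, h2, h3, hsrc, hsnk⟩
    have hdisj : ∀ x ∈ S, x ∉ T := fun x hx => (h1 x hx).2.2
    have hU := pv_union_append S T hdisj
    refine ⟨?_, ?_, ?_, ?_, ?_⟩
    · rw [PySem.Set.isdisjoint_iff]
      intro x hxS hxT
      rw [PySem.Set.mem_ofList] at hxS hxT
      exact hdisj x hxS hxT
    · simp only [PySem.Set.len, hU, List.length_append]
      push_cast
      omega
    · rw [List.any_eq_false]
      intro x hxU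
      rw [PySem.Set.mem_union, PySem.Set.mem_ofList, PySem.Set.mem_ofList] at hxU
      have : 0 ≤ x ∧ x < n := by
        rcases hxU with h | h
        · exact ⟨(h1 x h).1, (h1 x h).2.1⟩
        · exact h2 x h
      simpa using this
    · exact (PySem.Set.contains_iff _ _).mpr ((PySem.Set.mem_ofList _ _).mpr hsrc)
    · exact (PySem.Set.contains_iff _ _).mpr ((PySem.Set.mem_ofList _ _).mpr hsnk)

-- the cut-sum condition written with Sets equals Pre_'s plain-membership wording
theorem pv_cut_pre_eq (S T : List Int) (edges : List (Int × Int × Int)) :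
    ∀ acc : Int,
    edges.foldl (fun acc e =>
        if PySem.Set.contains (PySem.Set.ofList S) e.1
            && PySem.Set.contains (PySem.Set.ofList T) e.2.1 then acc + e.2.2 else acc) acc
      = edges.foldl (fun acc e => if e.1 ∈ S ∧ e.2.1 ∈ T then acc + e.2.2 else acc) acc := by
  induction edges with
  | nil => intro acc; rfl
  | cons e t ih =>
    intro acc
    simp only [List.foldl_cons]
    have hcond : (PySem.Set.contains (PySem.Set.ofList S) e.1
        && PySem.Set.contains (PySem.Set.ofList T) e.2.1) = decide (e.1 ∈ S ∧ e.2.1 ∈ T) := by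
      rw [Bool.eq_iff_iff]
      simp [PySem.Set.contains_iff, PySem.Set.mem_ofList]
    rw [hcond]
    by_cases hP : e.1 ∈ S ∧ e.2.1 ∈ T
    · have hd : decide (e.1 ∈ S ∧ e.2.1 ∈ T) = true := by simpa using hP
      rw [hd, if_pos rfl, if_pos hP]
      exact ih (acc + e.2.2)
    · have hd : decide (e.1 ∈ S ∧ e.2.1 ∈ T) = false := by simpa using hP
      rw [hd, if_neg Bool.false_ne_true, if_neg hP]
      exact ih acc


-- ---------- matrix / walk support lemmas ----------

def pvInR (n x : Int) : Prop := 0 ≤ x ∧ x < n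

def pvWFG (n : Int) (g : List (List Int)) : Prop :=
  g.length = n.toNat ∧ ∀ u : Int, pvInR n u → (PySem.List.pyGetD g u []).length = n.toNat

theorem pv_getD_setD {α : Type} (xs : List α) (i j : Int) (v d : α)
    (hi0 : 0 ≤ i) (hil : i.toNat < xs.length) (hj0 : 0 ≤ j) :
    PySem.List.pyGetD (PySem.List.pySetD xs i v) j d
      = if j = i then v else PySem.List.pyGetD xs j d := by
  have hi : i = ((i.toNat : Nat) : Int) := by omega
  have hj : j = ((j.toNat : Nat) : Int) := by omega
  rw [hi, hj, PySem.List.pyGetD_pySetD_natCast xs i.toNat j.toNat v d hil]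
  by_cases h : j = i
  · rw [if_pos (by omega), if_pos (by rw [← hi, ← hj, h])]
  · rw [if_neg (by omega), if_neg (by rw [← hi, ← hj]; exact h)]

theorem pv_getD_replicate {α : Type} (m : Nat) (a d : α) (j : Int)
    (hj0 : 0 ≤ j) (hj : j.toNat < m) :
    PySem.List.pyGetD (List.replicate m a) j d = a := by
  have h : j = ((j.toNat : Nat) : Int) := by omega
  rw [h, PySem.List.pyGetD_natCast]
  simp [List.getD, hj]

inductive pvParWalk (par : List Int) (src : Int) : Int → List Int → Prop
  | base : pvParWalk par src src [src]
  | step {u : Int} {p : List Int} (h : u ≠ src)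
      (hw : pvParWalk par src (PySem.List.pyGetD par u (-1)) p) :
      pvParWalk par src u (p ++ [u])

theorem pvParWalk_last {par : List Int} {src u : Int} {p : List Int}
    (h : pvParWalk par src u p) : ∃ q, p = q ++ [u] := by
  cases h with
  | base => exact ⟨[], rfl⟩
  | step _ _ => exact ⟨_, rfl⟩

theorem pvParWalk_mem_last {par : List Int} {src u : Int} {p : List Int}
    (h : pvParWalk par src u p) : u ∈ p := by
  rcases pvParWalk_last h with ⟨q, rfl⟩; simp

theorem pvParWalk_head {par : List Int} {src u : Int} {p : List Int}
    (h : pvParWalk par src u p) : p.head? = some src := by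
  induction h with
  | base => rfl
  | @step u' p' hne hw ih =>
    have hne' : p' ≠ [] := by
      intro hnil; rw [hnil] at ih; simp at ih
    rw [List.head?_append_of_ne_nil _ hne']
    exact ih

theorem pvParWalk_src_mem {par : List Int} {src u : Int} {p : List Int}
    (h : pvParWalk par src u p) : src ∈ p := by
  induction h with
  | base => simp
  | @step u' p' hne hw ih => simp [ih]

theorem pvParWalk_stable {par par' : List Int} {src u : Int} {p : List Int}
    (h : pvParWalk par src u p)
    (hagree : ∀ x ∈ p, x ≠ src →
      PySem.List.pyGetD par' x (-1) = PySem.List.pyGetD par x (-1)) :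
    pvParWalk par' src u p := by
  induction h with
  | base => exact pvParWalk.base
  | @step u' p' hne hw ih =>
    have hu' : u' ∈ p' ++ [u'] := by simp
    have heq := hagree u' hu' hne
    refine pvParWalk.step hne ?_
    rw [heq]
    exact ih (fun x hx hxs => hagree x (by simp [hx]) hxs)

def pvPairs (p : List Int) : List (Int × Int) := p.zip p.tail

theorem pvPairs_nil : pvPairs [] = [] := rfl

theorem pvPairs_single (a : Int) : pvPairs [a] = [] := rfl

theorem pvPairs_cons_cons (a b : Int) (l : List Int) :
    pvPairs (a :: b :: l) = (a, b) :: pvPairs (b :: l) := rfl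

theorem pvPairs_snoc : ∀ (q : List Int) (w u : Int),
    pvPairs ((q ++ [w]) ++ [u]) = pvPairs (q ++ [w]) ++ [(w, u)] := by
  intro q
  induction q with
  | nil => intro w u; rfl
  | cons a q' ih =>
    intro w u
    cases q' with
    | nil => rfl
    | cons c q'' =>
      have hih := ih w u
      simp only [List.cons_append, List.append_assoc] at hih ⊢
      rw [pvPairs_cons_cons, pvPairs_cons_cons, hih]; simp

theorem pvPairs_mem {p : List Int} {e : Int × Int} (h : e ∈ pvPairs p) :
    e.1 ∈ p ∧ e.2 ∈ p := by
  obtain ⟨h1, h2⟩ := List.of_mem_zip (a := e.1) (b := e.2) (by simpa using h)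
  exact ⟨h1, List.mem_of_mem_tail h2⟩

theorem pv_foldl_omin_some : ∀ (l : List Int) (a : Int),
    List.foldl (fun o x => some (match o with | none => x | some p => min p x)) (some a) l
      = some (List.foldl min a l) := by
  intro l
  induction l with
  | nil => intro a; rfl
  | cons x t ih => intro a; simp only [List.foldl_cons]; exact ih (min a x)

theorem pv_foldl_omin_none (l : List Int) :
    List.foldl (fun o x => some (match o with | none => x | some p => min p x)) none l
      = l.min? := by
  cases l with
  | nil => rfl
  | cons a t =>
    simp only [List.foldl_cons]
    exact pv_foldl_omin_some t a

theorem pv_min?_reverse (l : List Int) : l.reverse.min? = l.min? := by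
  cases hl : l.min? with
  | none =>
    have : l = [] := by
      cases l with
      | nil => rfl
      | cons a t => simp [List.min?] at hl
    simp [this]
  | some a =>
    rw [List.min?_eq_some_iff] at hl ⊢
    simpa using hl

theorem pv_walkMin_eq (g : List (List Int)) {par : List Int} {src : Int} :
    ∀ {u : Int} {p : List Int}, pvParWalk par src u p →
      ∀ fuel, p.length ≤ fuel → ∀ pf,
      pvWalkMin g par src fuel u pf
        = List.foldl (fun o x => some (match o with | none => x | some p => min p x)) pf
            (((pvPairs p).map (fun e => pvMatG g e.1 e.2)).reverse) := by
  intro u p hw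
  induction hw with
  | base =>
    intro fuel hf pf
    cases fuel with
    | zero => simp at hf
    | succ f => simp [pvWalkMin, pvPairs_single]
  | @step u' p' hne hwrec ih =>
    intro fuel hf pf
    cases fuel with
    | zero => simp at hf
    | succ fuel =>
      have hlen : p'.length ≤ fuel := by
        simp only [List.length_append, List.length_cons] at hf; omega
      rcases pvParWalk_last hwrec with ⟨q, hq⟩
      rw [pvWalkMin]
      rw [if_neg (by simpa using hne)]
      rw [ih fuel hlen]
      rw [hq, pvPairs_snoc]
      simp [← hq]

theorem pv_upd2 (n : Int) (g : List (List Int)) (pf w u : Int)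
    (hWF : pvWFG n g) (hw : pvInR n w) (hu : pvInR n u) (hne : w ≠ u) :
    pvWFG n (PySem.List.pySetD
        (PySem.List.pySetD g w
          (PySem.List.pySetD (PySem.List.pyGetD g w []) u (pvMatG g w u - pf))) u
        (PySem.List.pySetD
          (PySem.List.pyGetD
            (PySem.List.pySetD g w
              (PySem.List.pySetD (PySem.List.pyGetD g w []) u (pvMatG g w u - pf))) u [])
          w
          (pvMatG
            (PySem.List.pySetD g w
              (PySem.List.pySetD (PySem.List.pyGetD g w []) u (pvMatG g w u - pf))) u w + pf)))
      ∧
    ∀ a b : Int, pvInR n a → pvInR n b →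
      pvMatG (PySem.List.pySetD
        (PySem.List.pySetD g w
          (PySem.List.pySetD (PySem.List.pyGetD g w []) u (pvMatG g w u - pf))) u
        (PySem.List.pySetD
          (PySem.List.pyGetD
            (PySem.List.pySetD g w
              (PySem.List.pySetD (PySem.List.pyGetD g w []) u (pvMatG g w u - pf))) u [])
          w
          (pvMatG
            (PySem.List.pySetD g w
              (PySem.List.pySetD (PySem.List.pyGetD g w []) u (pvMatG g w u - pf))) u w + pf))) a b
      = pvMatG g a b - (if (a, b) = (w, u) then pf else 0)
        + (if (a, b) = (u, w) then pf else 0) := by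
  obtain ⟨hlen, hrow⟩ := hWF
  obtain ⟨hw0, hwn⟩ := hw
  obtain ⟨hu0, hun⟩ := hu
  have hwlt : w.toNat < g.length := by omega
  set rw1 := PySem.List.pySetD (PySem.List.pyGetD g w []) u (pvMatG g w u - pf) with hrw1
  set g1 := PySem.List.pySetD g w rw1 with hg1
  have hg1len : g1.length = n.toNat := by rw [hg1, PySem.List.length_pySetD]; omega
  have hg1row : ∀ a : Int, pvInR n a →
      PySem.List.pyGetD g1 a [] = if a = w then rw1 else PySem.List.pyGetD g a [] := by
    intro a ha
    rw [hg1, pv_getD_setD g w a rw1 [] hw0 hwlt ha.1]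
  have hg1rowlen : ∀ a : Int, pvInR n a → (PySem.List.pyGetD g1 a []).length = n.toNat := by
    intro a ha
    rw [hg1row a ha]
    by_cases hac : a = w
    · rw [if_pos hac, hrw1, PySem.List.length_pySetD]; exact hrow w ⟨hw0, hwn⟩
    · rw [if_neg hac]; exact hrow a ha
  have hult : u.toNat < g1.length := by omega
  set rw2 := PySem.List.pySetD (PySem.List.pyGetD g1 u []) w (pvMatG g1 u w + pf) with hrw2
  set g2 := PySem.List.pySetD g1 u rw2 with hg2
  have hg2len : g2.length = n.toNat := by rw [hg2, PySem.List.length_pySetD]; omega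
  have hg2row : ∀ a : Int, pvInR n a →
      PySem.List.pyGetD g2 a [] = if a = u then rw2 else PySem.List.pyGetD g1 a [] := by
    intro a ha
    rw [hg2, pv_getD_setD g1 u a rw2 [] hu0 hult ha.1]
  constructor
  · refine ⟨hg2len, ?_⟩
    intro a ha
    rw [hg2row a ha]
    by_cases hac : a = u
    · rw [if_pos hac, hrw2, PySem.List.length_pySetD]; exact hg1rowlen u ⟨hu0, hun⟩
    · rw [if_neg hac]; exact hg1rowlen a ha
  · intro a b ha hb
    have hrowlen_w : (PySem.List.pyGetD g w []).length = n.toNat := hrow w ⟨hw0, hwn⟩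
    have hult2 : u.toNat < (PySem.List.pyGetD g w []).length := by omega
    have hg1rowu : PySem.List.pyGetD g1 u [] = PySem.List.pyGetD g u [] := by
      rw [hg1row u ⟨hu0, hun⟩, if_neg (by intro h; exact hne h.symm)]
    have hwlt2 : w.toNat < (PySem.List.pyGetD g1 u []).length := by
      rw [hg1rowu]; have := hrow u ⟨hu0, hun⟩; omega
    have hmatg1 : pvMatG g1 u w = pvMatG g u w := by
      unfold pvMatG; rw [hg1rowu]
    have hmain : pvMatG g2 a b =
        if a = u ∧ b = w then pvMatG g u w + pf
        else if a = w ∧ b = u then pvMatG g w u - pf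
        else pvMatG g a b := by
      unfold pvMatG
      rw [hg2row a ha]
      by_cases hau : a = u
      · rw [if_pos hau, hrw2, pv_getD_setD _ w b _ 0 hw0 hwlt2 hb.1]
        by_cases hbw : b = w
        · rw [if_pos hbw, if_pos ⟨hau, hbw⟩, hmatg1]
          all_goals rfl
        · rw [if_neg hbw, hg1rowu,
            if_neg (fun hc => hbw hc.2),
            if_neg (fun hc => hne (hc.1.symm.trans hau)),
            hau]
          all_goals rfl
      · rw [if_neg hau, hg1row a ha]
        by_cases haw : a = w
        · rw [if_pos haw, hrw1, pv_getD_setD _ u b _ 0 hu0 hult2 hb.1]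
          by_cases hbu : b = u
          · rw [if_pos hbu, if_neg (fun hc => hau hc.1), if_pos ⟨haw, hbu⟩]
            all_goals rfl
          · rw [if_neg hbu,
              if_neg (fun hc => hau hc.1),
              if_neg (fun hc => hbu hc.2),
              haw]
            all_goals rfl
        · rw [if_neg haw,
            if_neg (fun hc => hau hc.1),
            if_neg (fun hc => haw hc.1)]
        all_goals rfl
    have hrhs1 : ((a, b) = (w, u)) ↔ (a = w ∧ b = u) := by simp
    have hrhs2 : ((a, b) = (u, w)) ↔ (a = u ∧ b = w) := by simp
    rw [hmain]
    simp only [hrhs1, hrhs2]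
    by_cases h1 : a = u ∧ b = w <;> by_cases h2 : a = w ∧ b = u <;>
      simp only [h1, h2, if_true, if_false, if_pos, if_neg] <;>
      first
        | omega
        | (obtain ⟨rfl, rfl⟩ := h1; omega)
        | (obtain ⟨rfl, rfl⟩ := h2; omega)
        | (simp [h1, h2]; omega)

theorem pv_ite_or (P Q : Prop) [Decidable P] [Decidable Q] (x : Int)
    (h : ¬(P ∧ Q)) :
    (if P ∨ Q then x else 0) = (if P then x else 0) + (if Q then x else 0) := by
  by_cases hP : P <;> by_cases hQ : Q <;> simp [hP, hQ] <;> exact absurd ⟨hP, hQ⟩ h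

theorem pv_walkUpd_spec (n : Int) {par : List Int} {src : Int} (pf : Int) :
    ∀ {u : Int} {p : List Int}, pvParWalk par src u p → p.Nodup →
      (∀ x ∈ p, pvInR n x) →
      ∀ fuel, p.length ≤ fuel → ∀ g, pvWFG n g →
      pvWFG n (pvWalkUpd par src pf fuel u g) ∧
      ∀ a b : Int, pvInR n a → pvInR n b →
        pvMatG (pvWalkUpd par src pf fuel u g) a b
          = pvMatG g a b - (if (a, b) ∈ pvPairs p then pf else 0)
            + (if (b, a) ∈ pvPairs p then pf else 0) := by
  intro u p hwalk
  induction hwalk with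
  | base =>
    intro hnd hrange fuel hf g hWF
    cases fuel with
    | zero => simp at hf
    | succ f =>
      constructor
      · simpa [pvWalkUpd] using hWF
      · intro a b _ _; simp [pvWalkUpd, pvPairs_single]
  | @step u' p' hne hwrec ih =>
    intro hnd hrange fuel hf g hWF
    cases fuel with
    | zero => simp at hf
    | succ fuel =>
      have hndp' : p'.Nodup := (List.nodup_append.mp hnd).1
      have hu'notp' : u' ∉ p' := by
        have hdisj := (List.nodup_append.mp hnd).2.2
        intro hmem
        exact hdisj u' hmem u' (List.mem_singleton_self u') rfl
      have hrangep' : ∀ x ∈ p', pvInR n x := fun x hx => hrange x (by simp [hx])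
      have hlenp' : p'.length ≤ fuel := by
        simp only [List.length_append, List.length_cons] at hf; omega
      rcases pvParWalk_last hwrec with ⟨q, hq⟩
      set w := PySem.List.pyGetD par u' (-1) with hwdef
      have hwmem : w ∈ p' := by rw [hq]; simp
      have hwInR : pvInR n w := hrangep' w hwmem
      have hu'InR : pvInR n u' := hrange u' (by simp)
      have hwne : w ≠ u' := fun h => hu'notp' (h ▸ hwmem)
      have hupd2 := pv_upd2 n g pf w u' hWF hwInR hu'InR hwne
      rw [pvWalkUpd]
      rw [if_neg (by simpa using hne)]
      have hih := ih hndp' hrangep' fuel hlenp' _ hupd2.1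
      refine ⟨hih.1, ?_⟩
      intro a b ha hb
      rw [hih.2 a b ha hb, hupd2.2 a b ha hb]
      have hpairs : pvPairs (p' ++ [u']) = pvPairs p' ++ [(w, u')] := by
        rw [hq, pvPairs_snoc, ← hq]
      have hnotin1 : (w, u') ∉ pvPairs p' := by
        intro hmem; exact hu'notp' (pvPairs_mem hmem).2
      rw [hpairs]
      simp only [List.mem_append, List.mem_singleton]
      have hx1 : ¬((a, b) ∈ pvPairs p' ∧ (a, b) = (w, u')) := by
        rintro ⟨hm, heq⟩
        have : a = w ∧ b = u' := by simpa [Prod.ext_iff] using heq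
        obtain ⟨rfl, rfl⟩ := this
        exact hnotin1 hm
      have hx2 : ¬((b, a) ∈ pvPairs p' ∧ (b, a) = (w, u')) := by
        rintro ⟨hm, heq⟩
        have : b = w ∧ a = u' := by simpa [Prod.ext_iff] using heq
        obtain ⟨rfl, rfl⟩ := this
        exact hnotin1 hm
      rw [pv_ite_or _ _ pf hx1, pv_ite_or _ _ pf hx2]
      have hcond : ((b, a) = (w, u')) ↔ ((a, b) = (u', w)) := by
        constructor <;> intro h <;>
          (simp only [Prod.ext_iff] at h ⊢; exact ⟨h.2, h.1⟩)
      simp only [hcond]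
      omega

theorem pv_updR_spec (pf : Int) :
    ∀ (p : List Int), p.Nodup → ∀ (r : PySem.Dict (Int × Int) Int) (c : Int × Int),
      (pvUpdR pf (pvPairs p) r).getD c 0
        = r.getD c 0 - (if c ∈ pvPairs p then pf else 0)
          + (if (c.2, c.1) ∈ pvPairs p then pf else 0) := by
  intro p
  induction p with
  | nil => intro _ r c; simp [pvPairs_nil, pvUpdR]
  | cons a tail ih =>
    intro hnd r c
    cases tail with
    | nil => simp [pvPairs_single, pvUpdR]
    | cons b t =>
      have hanb : a ∉ b :: t := (List.nodup_cons.mp hnd).1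
      have hab : a ≠ b := fun h => hanb (h ▸ List.mem_cons_self ..)
      have hndt : (b :: t).Nodup := (List.nodup_cons.mp hnd).2
      rw [pvPairs_cons_cons]
      have hstep : pvUpdR pf ((a, b) :: pvPairs (b :: t)) r
          = pvUpdR pf (pvPairs (b :: t))
              ((r.insert (a, b) (r.getD (a, b) 0 - pf)).insert (b, a)
                ((r.insert (a, b) (r.getD (a, b) 0 - pf)).getD (b, a) 0 + pf)) := rfl
      rw [hstep, ih hndt]
      have hba_ne : ((b, a) : Int × Int) ≠ (a, b) := by
        simp [Prod.ext_iff]; intro h; exact absurd h.symm hab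
      have hr2 : ∀ c' : Int × Int,
          ((r.insert (a, b) (r.getD (a, b) 0 - pf)).insert (b, a)
            ((r.insert (a, b) (r.getD (a, b) 0 - pf)).getD (b, a) 0 + pf)).getD c' 0
          = r.getD c' 0 - (if c' = (a, b) then pf else 0)
            + (if c' = (b, a) then pf else 0) := by
        intro c'
        rw [PySem.Dict.getD_insert, PySem.Dict.getD_insert, if_neg hba_ne,
          PySem.Dict.getD_insert]
        by_cases h1 : c' = (b, a)
        · subst h1
          rw [if_pos rfl, if_pos rfl, if_neg hba_ne]
          omega
        · rw [if_neg h1, if_neg h1]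
          by_cases h2 : c' = (a, b) <;> simp [h2]
      rw [hr2 c]
      have hnotin1 : ((a, b) : Int × Int) ∉ pvPairs (b :: t) := by
        intro hm; exact hanb (pvPairs_mem hm).1
      simp only [List.mem_cons]
      have hx1 : ¬(c = (a, b) ∧ c ∈ pvPairs (b :: t)) := by
        rintro ⟨rfl, hm⟩; exact hnotin1 hm
      have hx2 : ¬((c.2, c.1) = (a, b) ∧ (c.2, c.1) ∈ pvPairs (b :: t)) := by
        rintro ⟨heq, hm⟩; exact hnotin1 (heq ▸ hm)
      rw [pv_ite_or _ _ pf hx1, pv_ite_or _ _ pf hx2]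
      have hc1 : ((c.2, c.1) = (a, b)) ↔ (c = (b, a)) := by
        constructor <;> intro h <;>
          (simp only [Prod.ext_iff] at h ⊢; exact ⟨h.2, h.1⟩)
      simp only [hc1]
      omega

theorem pv_upd1 (n : Int) (g : List (List Int)) (u v x : Int)
    (hWF : pvWFG n g) (hu : pvInR n u) (hv : pvInR n v) :
    pvWFG n (PySem.List.pySetD g u
        (PySem.List.pySetD (PySem.List.pyGetD g u []) v x)) ∧
    ∀ a b : Int, pvInR n a → pvInR n b →
      pvMatG (PySem.List.pySetD g u
          (PySem.List.pySetD (PySem.List.pyGetD g u []) v x)) a b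
        = if a = u ∧ b = v then x else pvMatG g a b := by
  obtain ⟨hlen, hrow⟩ := hWF
  have hult : u.toNat < g.length := by rw [hlen]; rcases hu with ⟨h1, h2⟩; omega
  have hvlt : v.toNat < (PySem.List.pyGetD g u []).length := by
    rw [hrow u hu]; rcases hv with ⟨h1, h2⟩; omega
  have hrow' : ∀ a : Int, pvInR n a →
      PySem.List.pyGetD (PySem.List.pySetD g u
          (PySem.List.pySetD (PySem.List.pyGetD g u []) v x)) a []
        = if a = u then PySem.List.pySetD (PySem.List.pyGetD g u []) v x
          else PySem.List.pyGetD g a [] :=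
    fun a ha => pv_getD_setD g u a _ [] hu.1 hult ha.1
  constructor
  · constructor
    · rw [PySem.List.length_pySetD]; exact hlen
    · intro a ha
      rw [hrow' a ha]
      by_cases hau : a = u
      · rw [if_pos hau, PySem.List.length_pySetD]; exact hrow u hu
      · rw [if_neg hau]; exact hrow a ha
  · intro a b ha hb
    unfold pvMatG
    rw [hrow' a ha]
    by_cases hau : a = u
    · rw [if_pos hau, pv_getD_setD _ v b _ 0 hv.1 hvlt hb.1]
      by_cases hbv : b = v
      · rw [if_pos hbv, if_pos ⟨hau, hbv⟩]
      · rw [if_neg hbv, if_neg (fun hc => hbv hc.2), hau]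
    · rw [if_neg hau, if_neg (fun hc => hau hc.1)]

def pvRelG (n : Int) (g : List (List Int)) (r : PySem.Dict (Int × Int) Int) : Prop :=
  ∀ u v : Int, pvInR n u → pvInR n v → pvMatG g u v = r.getD (u, v) 0

theorem pv_build_rel (n : Int) (edges : List (Int × Int × Int))
    (hrange : ∀ e ∈ edges, pvInR n e.1 ∧ pvInR n e.2.1) :
    pvWFG n (pvBuildG n edges) ∧ pvRelG n (pvBuildG n edges) (pvBuildR edges) := by
  suffices h : ∀ (es : List (Int × Int × Int)), (∀ e ∈ es, pvInR n e.1 ∧ pvInR n e.2.1) →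
      ∀ (g : List (List Int)) (d : PySem.Dict (Int × Int) Int), pvWFG n g →
        (∀ a b : Int, pvInR n a → pvInR n b → pvMatG g a b = d.getD (a, b) 0) →
        pvWFG n (es.foldl (fun g e =>
            PySem.List.pySetD g e.1
              (PySem.List.pySetD (PySem.List.pyGetD g e.1 [])
                e.2.1 (pvMatG g e.1 e.2.1 + e.2.2))) g) ∧
        (∀ a b : Int, pvInR n a → pvInR n b →
          pvMatG (es.foldl (fun g e =>
            PySem.List.pySetD g e.1
              (PySem.List.pySetD (PySem.List.pyGetD g e.1 [])
                e.2.1 (pvMatG g e.1 e.2.1 + e.2.2))) g) a b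
          = (es.foldl (fun d e => d.insert (e.1, e.2.1) (d.getD (e.1, e.2.1) 0 + e.2.2)) d).getD (a, b) 0) by
    have hWF0 : pvWFG n (List.replicate n.toNat (List.replicate n.toNat 0)) := by
      constructor
      · rw [List.length_replicate]
      · intro u hu
        rw [pv_getD_replicate n.toNat _ [] u hu.1 (by rcases hu with ⟨h1, h2⟩; omega)]
        rw [List.length_replicate]
    have h0 : ∀ a b : Int, pvInR n a → pvInR n b →
        pvMatG (List.replicate n.toNat (List.replicate n.toNat 0)) a b
          = (PySem.Dict.empty : PySem.Dict (Int × Int) Int).getD (a, b) 0 := by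
      intro a b ha hb
      unfold pvMatG
      rw [pv_getD_replicate n.toNat _ [] a ha.1 (by rcases ha with ⟨h1, h2⟩; omega)]
      rw [pv_getD_replicate n.toNat _ 0 b hb.1 (by rcases hb with ⟨h1, h2⟩; omega)]
      simp [PySem.Dict.getD, PySem.Dict.get?, PySem.Dict.empty]
    exact (h edges hrange _ PySem.Dict.empty hWF0 h0).imp id (fun hh a => hh a)
  intro es
  induction es with
  | nil =>
    intro _ g d hWF hrel
    exact ⟨hWF, fun a b ha hb => by simpa using hrel a b ha hb⟩
  | cons e t ihe =>
    intro hr g d hWF hrel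
    have he := hr e (List.mem_cons_self ..)
    have ht : ∀ e' ∈ t, pvInR n e'.1 ∧ pvInR n e'.2.1 :=
      fun e' he' => hr e' (List.mem_cons_of_mem _ he')
    have hu1 := pv_upd1 n g e.1 e.2.1 (pvMatG g e.1 e.2.1 + e.2.2) hWF he.1 he.2
    simp only [List.foldl_cons]
    apply ihe ht _ _ hu1.1
    intro a b ha hb
    rw [hu1.2 a b ha hb, PySem.Dict.getD_insert]
    by_cases hc : a = e.1 ∧ b = e.2.1
    · rw [if_pos hc, if_pos (by simp [Prod.ext_iff, hc.1, hc.2]), hrel e.1 e.2.1 he.1 he.2]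
    · rw [if_neg hc, if_neg (fun hp => hc (by simpa [Prod.ext_iff] using hp)),
        hrel a b ha hb]

theorem pv_nodup_len (n : Int) (p : List Int) (hnd : p.Nodup)
    (hr : ∀ x ∈ p, pvInR n x) : p.length ≤ n.toNat := by
  have hsub : p.toFinset ⊆ (PySem.List.pyRange 0 n 1).toFinset := by
    intro x hx
    rw [List.mem_toFinset] at hx ⊢
    rw [PySem.List.mem_pyRange_one]
    exact ⟨(hr x hx).1, (hr x hx).2⟩
  have := Finset.card_le_card hsub
  rw [List.toFinset_card_of_nodup hnd,
    List.toFinset_card_of_nodup (PySem.List.nodup_pyRange_one 0 n),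
    PySem.List.length_pyRange_one] at this
  omega


-- ---------- abstract flow accounting (max-flow = min-cut core) ----------

noncomputable def pvIcc (n : Int) : Finset Int := Finset.Icc 0 (n - 1)

theorem pv_mem_Icc {n x : Int} : x ∈ pvIcc n ↔ pvInR n x := by
  simp only [pvIcc, Finset.mem_Icc, pvInR]
  omega

-- net flow into w of the flow c - ρ (ρ = residual, c = capacity)
noncomputable def pvEx (n : Int) (c ρ : Int → Int → Int) (w : Int) : Int :=
  ∑ v ∈ pvIcc n, (c v w - ρ v w)

-- ρ is the residual of a feasible s-t flow of value fl
def pvValid (n : Int) (c : Int → Int → Int) (s t : Int) (ρ : Int → Int → Int) (fl : Int) : Prop :=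
  (∀ u ∈ pvIcc n, ∀ v ∈ pvIcc n, ρ u v + ρ v u = c u v + c v u) ∧
  (∀ u ∈ pvIcc n, ∀ v ∈ pvIcc n, 0 ≤ ρ u v) ∧
  (∀ w ∈ pvIcc n, w ≠ s → w ≠ t → pvEx n c ρ w = 0) ∧
  pvEx n c ρ t = fl

theorem pv_skew_sum (T : Finset Int) (f : Int → Int → Int)
    (h : ∀ a ∈ T, ∀ b ∈ T, f a b + f b a = 0) :
    ∑ a ∈ T, ∑ b ∈ T, f a b = 0 := by
  have hc : ∑ a ∈ T, ∑ b ∈ T, f a b = ∑ a ∈ T, ∑ b ∈ T, f b a := Finset.sum_comm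
  have hz : (∑ a ∈ T, ∑ b ∈ T, f a b) + (∑ a ∈ T, ∑ b ∈ T, f b a) = 0 := by
    rw [← Finset.sum_add_distrib]
    refine Finset.sum_eq_zero (fun a ha => ?_)
    rw [← Finset.sum_add_distrib]
    exact Finset.sum_eq_zero (fun b hb => h a ha b hb)
  omega

theorem pv_cut_value {n : Int} {c : Int → Int → Int} {s t : Int} {ρ : Int → Int → Int} {fl : Int}
    (hV : pvValid n c s t ρ fl)
    (S : Finset Int) (hS : S ⊆ pvIcc n) (hs : s ∈ S) (ht : t ∈ pvIcc n) (htS : t ∉ S) :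
    fl = ∑ u ∈ S, ∑ v ∈ pvIcc n \ S, (c u v - ρ u v) := by
  obtain ⟨h1, h2, h3, h4⟩ := hV
  have hfl : fl = ∑ w ∈ pvIcc n \ S, pvEx n c ρ w := by
    rw [← h4]
    symm
    apply Finset.sum_eq_single_of_mem t (Finset.mem_sdiff.mpr ⟨ht, htS⟩)
    intro w hw hwt
    rcases Finset.mem_sdiff.mp hw with ⟨hwI, hwS⟩
    exact h3 w hwI (fun hws => hwS (hws ▸ hs)) hwt
  rw [hfl]
  unfold pvEx
  rw [Finset.sum_comm, ← Finset.sum_sdiff hS]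
  have hzero : ∑ v ∈ pvIcc n \ S, ∑ w ∈ pvIcc n \ S, (c v w - ρ v w) = 0 := by
    apply pv_skew_sum
    intro a ha b hb
    have haI := (Finset.mem_sdiff.mp ha).1
    have hbI := (Finset.mem_sdiff.mp hb).1
    have := h1 a haI b hbI
    omega
  rw [hzero, zero_add]

theorem pv_value_le {n : Int} {c : Int → Int → Int} {s t : Int} {ρ : Int → Int → Int} {fl : Int}
    (hV : pvValid n c s t ρ fl)
    (S : Finset Int) (hS : S ⊆ pvIcc n) (hs : s ∈ S) (ht : t ∈ pvIcc n) (htS : t ∉ S) :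
    fl ≤ ∑ u ∈ S, ∑ v ∈ pvIcc n \ S, c u v := by
  rw [pv_cut_value hV S hS hs ht htS]
  refine Finset.sum_le_sum (fun u hu => Finset.sum_le_sum (fun v hv => ?_))
  have h2 := hV.2.1 u (hS hu) v (Finset.mem_sdiff.mp hv).1
  omega

theorem pv_value_eq_cap {n : Int} {c : Int → Int → Int} {s t : Int} {ρ : Int → Int → Int} {fl : Int}
    (hV : pvValid n c s t ρ fl)
    (S : Finset Int) (hS : S ⊆ pvIcc n) (hs : s ∈ S) (ht : t ∈ pvIcc n) (htS : t ∉ S)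
    (hz : ∀ u ∈ S, ∀ v ∈ pvIcc n \ S, ρ u v = 0) :
    fl = ∑ u ∈ S, ∑ v ∈ pvIcc n \ S, c u v := by
  rw [pv_cut_value hV S hS hs ht htS]
  refine Finset.sum_congr rfl (fun u hu => Finset.sum_congr rfl (fun v hv => ?_))
  rw [hz u hu v hv, sub_zero]

-- x is the (unique) maximal feasible flow value
def pvIsMax (n : Int) (c : Int → Int → Int) (s t x : Int) : Prop :=
  (∃ ρ, pvValid n c s t ρ x) ∧ ∀ y ρ', pvValid n c s t ρ' y → y ≤ x

theorem pvIsMax_unique {n : Int} {c : Int → Int → Int} {s t x y : Int}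
    (hx : pvIsMax n c s t x) (hy : pvIsMax n c s t y) : x = y := by
  obtain ⟨⟨ρx, hρx⟩, hxmax⟩ := hx
  obtain ⟨⟨ρy, hρy⟩, hymax⟩ := hy
  exact le_antisymm (hymax x ρx hρx) (hxmax y ρy hρy)

theorem pv_fl_le_total {n : Int} {c : Int → Int → Int} {s t : Int} {ρ : Int → Int → Int} {fl : Int}
    (hV : pvValid n c s t ρ fl)
    (hc : ∀ u ∈ pvIcc n, ∀ v ∈ pvIcc n, 0 ≤ c u v)
    (hs : s ∈ pvIcc n) (ht : t ∈ pvIcc n) (hst : s ≠ t) :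
    fl ≤ ∑ u ∈ pvIcc n, ∑ v ∈ pvIcc n, c u v := by
  have h1 := pv_value_le hV {s} (by simpa using hs) (Finset.mem_singleton_self s) ht
    (by simpa using (Ne.symm hst))
  refine le_trans h1 ?_
  rw [Finset.sum_singleton]
  have hinner : ∑ v ∈ pvIcc n \ {s}, c s v ≤ ∑ v ∈ pvIcc n, c s v :=
    Finset.sum_le_sum_of_subset_of_nonneg Finset.sdiff_subset (fun v hv _ => hc s hs v hv)
  refine le_trans hinner ?_
  exact Finset.single_le_sum (f := fun u => ∑ v ∈ pvIcc n, c u v)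
    (fun u hu => Finset.sum_nonneg (fun v hv => hc u hu v hv)) hs

theorem pv_valid_congr {n : Int} {c : Int → Int → Int} {s t : Int} {ρ ρ' : Int → Int → Int}
    {fl : Int} (ht : t ∈ pvIcc n)
    (h : ∀ u ∈ pvIcc n, ∀ v ∈ pvIcc n, ρ u v = ρ' u v)
    (hV : pvValid n c s t ρ fl) : pvValid n c s t ρ' fl := by
  obtain ⟨h1, h2, h3, h4⟩ := hV
  have hex : ∀ w ∈ pvIcc n, pvEx n c ρ' w = pvEx n c ρ w := by
    intro w hw
    exact Finset.sum_congr rfl (fun v hv => by rw [h v hv w hw])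
  refine ⟨?_, ?_, ?_, ?_⟩
  · intro u hu v hv; rw [← h u hu v hv, ← h v hv u hu]; exact h1 u hu v hv
  · intro u hu v hv; rw [← h u hu v hv]; exact h2 u hu v hv
  · intro w hw hws hwt; rw [hex w hw]; exact h3 w hw hws hwt
  · rw [hex t ht]; exact h4

theorem pv_valid_init (n : Int) (c : Int → Int → Int) (s t : Int)
    (hc : ∀ u ∈ pvIcc n, ∀ v ∈ pvIcc n, 0 ≤ c u v) :
    pvValid n c s t c 0 := by
  refine ⟨fun u _ v _ => by ring, hc, ?_, ?_⟩
  · intro w _ _ _; unfold pvEx; simp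
  · unfold pvEx; simp

-- ---------- path-pair counting on nodup paths ----------

theorem pvPairs_mem_tail {p : List Int} {u v : Int} (h : (u, v) ∈ pvPairs p) : v ∈ p.tail :=
  (List.of_mem_zip h).2

theorem pvPairs_fst_dropLast : ∀ {p : List Int} {u v : Int},
    (u, v) ∈ pvPairs p → u ∈ p.dropLast := by
  intro p
  induction p with
  | nil => intro u v h; simp [pvPairs_nil] at h
  | cons a q ih =>
    cases q with
    | nil => intro u v h; simp [pvPairs_single] at h
    | cons b l =>
      intro u v h
      rw [pvPairs_cons_cons] at h
      rcases List.mem_cons.mp h with he | ht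
      · have : u = a := (Prod.mk.injEq _ _ _ _ ▸ he).1
        subst this
        simp
      · have := ih ht
        simp only [List.dropLast_cons₂, List.mem_cons]
        right; exact this

theorem pvPairs_pred : ∀ {p : List Int} {v : Int}, v ∈ p.tail → ∃ u, (u, v) ∈ pvPairs p := by
  intro p
  induction p with
  | nil => intro v h; simp at h
  | cons a q ih =>
    cases q with
    | nil => intro v h; simp at h
    | cons b l =>
      intro v h
      simp only [List.tail_cons] at h
      rcases List.mem_cons.mp h with he | ht
      · subst he; exact ⟨a, by rw [pvPairs_cons_cons]; exact List.mem_cons_self ..⟩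
      · obtain ⟨u, hu⟩ := ih (by simpa using ht)
        exact ⟨u, by rw [pvPairs_cons_cons]; exact List.mem_cons_of_mem _ hu⟩

theorem pvPairs_succ : ∀ {p : List Int} {u : Int}, u ∈ p.dropLast → ∃ v, (u, v) ∈ pvPairs p := by
  intro p
  induction p with
  | nil => intro u h; simp at h
  | cons a q ih =>
    cases q with
    | nil => intro u h; simp at h
    | cons b l =>
      intro u h
      simp only [List.dropLast_cons₂, List.mem_cons] at h
      rcases h with he | ht
      · subst he; exact ⟨b, by rw [pvPairs_cons_cons]; exact List.mem_cons_self ..⟩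
      · obtain ⟨v, hv⟩ := ih ht
        exact ⟨v, by rw [pvPairs_cons_cons]; exact List.mem_cons_of_mem _ hv⟩



theorem pvPairs_pred_unique : ∀ {p : List Int}, p.Nodup → ∀ {u u' v : Int},
    (u, v) ∈ pvPairs p → (u', v) ∈ pvPairs p → u = u' := by
  intro p
  induction p with
  | nil => intro _ u u' v h; simp [pvPairs_nil] at h
  | cons a q ih =>
    cases q with
    | nil => intro _ u u' v h; simp [pvPairs_single] at h
    | cons b l =>
      intro hnd u u' v h1 h2
      have hbl : b ∉ l := (List.nodup_cons.mp (List.nodup_cons.mp hnd).2).1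
      rw [pvPairs_cons_cons] at h1 h2
      rcases List.mem_cons.mp h1 with he1 | ht1 <;> rcases List.mem_cons.mp h2 with he2 | ht2
      · have e1 := Prod.mk.injEq .. ▸ he1
        have e2 := Prod.mk.injEq .. ▸ he2
        omega
      · have e1 := Prod.mk.injEq .. ▸ he1
        have hv : v = b := e1.2
        subst hv
        exact absurd (by simpa using pvPairs_mem_tail ht2) hbl
      · have e2 := Prod.mk.injEq .. ▸ he2
        have hv : v = b := e2.2
        subst hv
        exact absurd (by simpa using pvPairs_mem_tail ht1) hbl
      · exact ih (List.nodup_cons.mp hnd).2 ht1 ht2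

theorem pvPairs_succ_unique : ∀ {p : List Int}, p.Nodup → ∀ {u v v' : Int},
    (u, v) ∈ pvPairs p → (u, v') ∈ pvPairs p → v = v' := by
  intro p
  induction p with
  | nil => intro _ u v v' h; simp [pvPairs_nil] at h
  | cons a q ih =>
    cases q with
    | nil => intro _ u v v' h; simp [pvPairs_single] at h
    | cons b l =>
      intro hnd u v v' h1 h2
      have habl : a ∉ b :: l := (List.nodup_cons.mp hnd).1
      rw [pvPairs_cons_cons] at h1 h2
      rcases List.mem_cons.mp h1 with he1 | ht1 <;> rcases List.mem_cons.mp h2 with he2 | ht2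
      · have e1 := Prod.mk.injEq .. ▸ he1
        have e2 := Prod.mk.injEq .. ▸ he2
        omega
      · have e1 := Prod.mk.injEq .. ▸ he1
        have hu : u = a := e1.1
        subst hu
        exact absurd (List.mem_of_mem_dropLast (pvPairs_fst_dropLast ht2)) habl
      · have e2 := Prod.mk.injEq .. ▸ he2
        have hu : u = a := e2.1
        subst hu
        exact absurd (List.mem_of_mem_dropLast (pvPairs_fst_dropLast ht1)) habl
      · exact ih (List.nodup_cons.mp hnd).2 ht1 ht2

theorem pvPairs_not_rev : ∀ {p : List Int}, p.Nodup → ∀ {u v : Int},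
    (u, v) ∈ pvPairs p → (v, u) ∉ pvPairs p := by
  intro p
  induction p with
  | nil => intro _ u v h; simp [pvPairs_nil] at h
  | cons a q ih =>
    cases q with
    | nil => intro _ u v h; simp [pvPairs_single] at h
    | cons b l =>
      intro hnd u v h1 h2
      have habl : a ∉ b :: l := (List.nodup_cons.mp hnd).1
      have hbl : b ∉ l := (List.nodup_cons.mp (List.nodup_cons.mp hnd).2).1
      rw [pvPairs_cons_cons] at h1 h2
      rcases List.mem_cons.mp h1 with he1 | ht1 <;> rcases List.mem_cons.mp h2 with he2 | ht2
      · have e1 := Prod.mk.injEq .. ▸ he1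
        have e2 := Prod.mk.injEq .. ▸ he2
        have hab : a = b := by omega
        exact habl (hab ▸ List.mem_cons_self ..)
      · have e1 := Prod.mk.injEq .. ▸ he1
        have hu : u = a := e1.1
        subst hu
        exact habl (by simpa using List.mem_of_mem_tail (pvPairs_mem_tail ht2))
      · have e2 := Prod.mk.injEq .. ▸ he2
        have hu2 : u = b := e2.2
        subst hu2
        have hv2 : v = a := e2.1
        subst hv2
        exact habl (by simpa using List.mem_of_mem_tail (pvPairs_mem_tail ht1))
      · exact ih (List.nodup_cons.mp hnd).2 ht1 ht2

theorem pv_tail_mem {p : List Int} {s w : Int} (hnd : p.Nodup) (hh : p.head? = some s) :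
    w ∈ p.tail ↔ (w ∈ p ∧ w ≠ s) := by
  obtain ⟨rest, rfl⟩ : ∃ rest, p = s :: rest := by
    cases p with
    | nil => simp at hh
    | cons a l => exact ⟨l, by simpa using (by simpa using hh : a = s) ▸ rfl⟩
  have hsrest : s ∉ rest := (List.nodup_cons.mp hnd).1
  simp only [List.tail_cons, List.mem_cons]
  constructor
  · intro hw
    exact ⟨Or.inr hw, fun he => hsrest (he ▸ hw)⟩
  · rintro ⟨(he | hw), hne⟩
    · exact absurd he hne
    · exact hw

theorem pv_dropLast_mem {p : List Int} {t w : Int} (hnd : p.Nodup) (hl : p.getLast? = some t) :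
    w ∈ p.dropLast ↔ (w ∈ p ∧ w ≠ t) := by
  have hne : p ≠ [] := by rintro rfl; simp at hl
  obtain ⟨q, rfl⟩ : ∃ q, p = q ++ [t] := by
    refine ⟨p.dropLast, ?_⟩
    have h1 : p.getLast hne = t := by
      have := List.getLast?_eq_some_getLast (l := p) hne
      rw [this] at hl
      simpa using hl
    rw [← h1]
    exact (List.dropLast_append_getLast hne).symm
  have htq : t ∉ q := by
    have := List.disjoint_of_nodup_append hnd
    intro hm
    exact this hm (List.mem_singleton_self t)
  rw [List.dropLast_concat]
  simp only [List.mem_append, List.mem_singleton]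
  constructor
  · intro hw
    exact ⟨Or.inl hw, fun he => htq (he ▸ hw)⟩
  · rintro ⟨(hw | he), hne'⟩
    · exact hw
    · exact absurd he hne'

theorem pv_sum_ind_snd (n : Int) {p : List Int} (hnd : p.Nodup)
    (hpV : ∀ x ∈ p, x ∈ pvIcc n) (w pf : Int) :
    (∑ v ∈ pvIcc n, if (v, w) ∈ pvPairs p then pf else 0) = if w ∈ p.tail then pf else 0 := by
  by_cases hw : w ∈ p.tail
  · obtain ⟨u0, hu0⟩ := pvPairs_pred hw
    rw [if_pos hw]
    rw [Finset.sum_eq_single_of_mem u0 (hpV u0 (pvPairs_mem hu0).1)]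
    · rw [if_pos hu0]
    · intro b _ hbne
      rw [if_neg]
      intro hbmem
      exact hbne (pvPairs_pred_unique hnd hbmem hu0)
  · rw [if_neg hw]
    refine Finset.sum_eq_zero (fun v _ => ?_)
    rw [if_neg]
    intro hmem
    exact hw (pvPairs_mem_tail hmem)

theorem pv_sum_ind_fst (n : Int) {p : List Int} (hnd : p.Nodup)
    (hpV : ∀ x ∈ p, x ∈ pvIcc n) (w pf : Int) :
    (∑ v ∈ pvIcc n, if (w, v) ∈ pvPairs p then pf else 0)
      = if w ∈ p.dropLast then pf else 0 := by
  by_cases hw : w ∈ p.dropLast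
  · obtain ⟨v0, hv0⟩ := pvPairs_succ hw
    rw [if_pos hw]
    rw [Finset.sum_eq_single_of_mem v0 (hpV v0 (pvPairs_mem hv0).2)]
    · rw [if_pos hv0]
    · intro b _ hbne
      rw [if_neg]
      intro hbmem
      exact hbne (pvPairs_succ_unique hnd hbmem hv0)
  · rw [if_neg hw]
    refine Finset.sum_eq_zero (fun v _ => ?_)
    rw [if_neg]
    intro hmem
    exact hw (pvPairs_fst_dropLast hmem)

-- augmenting pf along a simple s-t path preserves validity and raises the value by pf
theorem pv_aug {n : Int} {c : Int → Int → Int} {s t : Int} {ρ ρ' : Int → Int → Int}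
    {fl pf : Int} {p : List Int}
    (hV : pvValid n c s t ρ fl)
    (hnd : p.Nodup) (hpV : ∀ x ∈ p, x ∈ pvIcc n)
    (hh : p.head? = some s) (hl : p.getLast? = some t) (hst : s ≠ t)
    (hpf0 : 0 ≤ pf)
    (hpfle : ∀ e ∈ pvPairs p, pf ≤ ρ e.1 e.2)
    (hρ' : ∀ u ∈ pvIcc n, ∀ v ∈ pvIcc n,
      ρ' u v = ρ u v - (if (u, v) ∈ pvPairs p then pf else 0)
        + (if (v, u) ∈ pvPairs p then pf else 0)) :
    pvValid n c s t ρ' (fl + pf) := by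
  obtain ⟨h1, h2, h3, h4⟩ := hV
  have hex : ∀ w ∈ pvIcc n, pvEx n c ρ' w
      = pvEx n c ρ w + (if w ∈ p.tail then pf else 0)
        - (if w ∈ p.dropLast then pf else 0) := by
    intro w hw
    unfold pvEx
    have hsplit : ∀ v ∈ pvIcc n, c v w - ρ' v w
        = ((c v w - ρ v w) + (if (v, w) ∈ pvPairs p then pf else 0))
          - (if (w, v) ∈ pvPairs p then pf else 0) := by
      intro v hv
      rw [hρ' v hv w hw]
      ring
    rw [Finset.sum_congr rfl hsplit, Finset.sum_sub_distrib, Finset.sum_add_distrib]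
    rw [pv_sum_ind_snd n hnd hpV w pf, pv_sum_ind_fst n hnd hpV w pf]
  refine ⟨?_, ?_, ?_, ?_⟩
  · intro u hu v hv
    rw [hρ' u hu v hv, hρ' v hv u hu]
    have := h1 u hu v hv
    omega
  · intro u hu v hv
    rw [hρ' u hu v hv]
    by_cases hA : (u, v) ∈ pvPairs p
    · have hB : (v, u) ∉ pvPairs p := pvPairs_not_rev hnd hA
      have hle := hpfle (u, v) hA
      simp only [if_pos hA, if_neg hB]
      simp only at hle
      omega
    · by_cases hB : (v, u) ∈ pvPairs p
      · have := h2 u hu v hv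
        simp only [if_neg hA, if_pos hB]
        omega
      · have := h2 u hu v hv
        simp only [if_neg hA, if_neg hB]
        omega
  · intro w hw hws hwt
    rw [hex w hw, h3 w hw hws hwt]
    by_cases hwp : w ∈ p
    · have h1' : w ∈ p.tail := (pv_tail_mem hnd hh).mpr ⟨hwp, hws⟩
      have h2' : w ∈ p.dropLast := (pv_dropLast_mem hnd hl).mpr ⟨hwp, hwt⟩
      simp [h1', h2']
    · have h1' : w ∉ p.tail := fun h => hwp (List.mem_of_mem_tail h)
      have h2' : w ∉ p.dropLast := fun h => hwp (List.mem_of_mem_dropLast h)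
      simp [h1', h2']
  · have htp : t ∈ p := by
      have hne : p ≠ [] := by rintro rfl; simp at hl
      have h1' : p.getLast hne = t := by
        have := List.getLast?_eq_some_getLast (l := p) hne
        rw [this] at hl
        simpa using hl
      exact h1' ▸ List.getLast_mem hne
    have htI : t ∈ pvIcc n := hpV t htp
    rw [hex t htI, h4]
    have h1' : t ∈ p.tail := (pv_tail_mem hnd hh).mpr ⟨htp, Ne.symm hst⟩
    have h2' : t ∉ p.dropLast := by
      intro h
      exact ((pv_dropLast_mem hnd hl).mp h).2 rfl
    simp [h1', h2']


-- ---------- capacity-function facts ----------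

theorem pv_buildR_getD : ∀ (edges : List (Int × Int × Int)) (d : PySem.Dict (Int × Int) Int)
    (k : Int × Int),
    (edges.foldl (fun d e => d.insert (e.1, e.2.1) (d.getD (e.1, e.2.1) 0 + e.2.2)) d).getD k 0
      = d.getD k 0 + ((edges.filter (fun e => decide ((e.1, e.2.1) = k))).map (·.2.2)).sum := by
  intro edges
  induction edges with
  | nil => intro d k; simp
  | cons e t ih =>
    intro d k
    rw [List.foldl_cons, ih]
    rw [PySem.Dict.getD_insert]
    by_cases hk : (e.1, e.2.1) = k
    · subst hk
      rw [if_pos rfl, List.filter_cons_of_pos (by simp)]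
      simp only [List.map_cons, List.sum_cons]
      omega
    · rw [if_neg (fun h => hk h.symm), List.filter_cons_of_neg (by simpa using hk)]

theorem pv_c_nonneg (edges : List (Int × Int × Int)) (hcap : ∀ e ∈ edges, 0 ≤ e.2.2) :
    ∀ k : Int × Int, 0 ≤ (pvBuildR edges).getD k 0 := by
  intro k
  rw [pvBuildR, pv_buildR_getD]
  have h0 : (PySem.Dict.empty : PySem.Dict (Int × Int) Int).getD k 0 = 0 := by
    simp [PySem.Dict.getD, PySem.Dict.get?, PySem.Dict.empty]
  rw [h0, zero_add]
  refine List.sum_nonneg ?_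
  intro x hx
  obtain ⟨e, he, rfl⟩ := List.mem_map.mp hx
  exact hcap e (List.mem_of_mem_filter he)

theorem pv_c_cons (e : Int × Int × Int) (t : List (Int × Int × Int)) (k : Int × Int) :
    (pvBuildR (e :: t)).getD k 0
      = (pvBuildR t).getD k 0 + (if (e.1, e.2.1) = k then e.2.2 else 0) := by
  rw [pvBuildR, pvBuildR, pv_buildR_getD, pv_buildR_getD]
  by_cases hk : (e.1, e.2.1) = k
  · subst hk
    rw [List.filter_cons_of_pos (by simp), if_pos rfl]
    simp only [List.map_cons, List.sum_cons]
    omega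
  · rw [List.filter_cons_of_neg (by simpa using hk), if_neg hk]
    omega

noncomputable def pvTC (n : Int) (edges : List (Int × Int × Int)) : Int :=
  ∑ u ∈ pvIcc n, ∑ v ∈ pvIcc n, (pvBuildR edges).getD (u, v) 0

theorem pv_sum_pair_ite_le (n : Int) (k : Int × Int) (x : Int) (hx : 0 ≤ x) :
    ∑ u ∈ pvIcc n, ∑ v ∈ pvIcc n, (if k = (u, v) then x else 0) ≤ x := by
  by_cases hk1 : k.1 ∈ pvIcc n
  · rw [Finset.sum_eq_single_of_mem k.1 hk1 ?side]
    case side =>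
      intro b _ hbne
      refine Finset.sum_eq_zero (fun v _ => ?_)
      rw [if_neg]
      intro h
      exact hbne (by rw [h])
    have hcong : ∀ v ∈ pvIcc n, (if k = (k.1, v) then x else 0) = (if v = k.2 then x else 0) := by
      intro v _
      congr 1
      rw [eq_iff_iff]
      constructor
      · intro h; exact (congrArg Prod.snd h).symm
      · intro h; subst h; exact Prod.mk.eta.symm
    rw [Finset.sum_congr rfl hcong, Finset.sum_ite_eq' (pvIcc n) k.2 (fun _ => x)]
    split_ifs <;> omega
  · refine le_trans (le_of_eq (Finset.sum_eq_zero (fun u hu => Finset.sum_eq_zero (fun v _ => ?_)))) hx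
    rw [if_neg]
    intro h
    exact hk1 (by rw [h]; exact hu)

theorem pv_foldl_natAbs (edges : List (Int × Int × Int)) :
    ∀ acc : Nat, edges.foldl (fun a e => a + e.2.2.natAbs) acc
      = acc + (edges.map (fun e => e.2.2.natAbs)).sum := by
  induction edges with
  | nil => intro acc; simp
  | cons e t ih =>
    intro acc
    rw [List.foldl_cons, ih]
    simp only [List.map_cons, List.sum_cons]
    omega

theorem pv_TC_le (n : Int) : ∀ edges : List (Int × Int × Int),
    pvTC n edges ≤ ((edges.map (fun e => e.2.2.natAbs)).sum : Int) := by
  intro edges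
  induction edges with
  | nil =>
    unfold pvTC
    have h0 : ∀ k : Int × Int, (pvBuildR []).getD k 0 = 0 := by
      intro k
      simp [pvBuildR, PySem.Dict.getD, PySem.Dict.get?, PySem.Dict.empty]
    simp [h0]
  | cons e t ih =>
    unfold pvTC at ih ⊢
    have hsplit : ∀ u v : Int, (pvBuildR (e :: t)).getD (u, v) 0
        = (pvBuildR t).getD (u, v) 0 + (if (e.1, e.2.1) = (u, v) then e.2.2 else 0) :=
      fun u v => pv_c_cons e t (u, v)
    have hstep : ∑ u ∈ pvIcc n, ∑ v ∈ pvIcc n, (pvBuildR (e :: t)).getD (u, v) 0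
        = (∑ u ∈ pvIcc n, ∑ v ∈ pvIcc n, (pvBuildR t).getD (u, v) 0)
          + ∑ u ∈ pvIcc n, ∑ v ∈ pvIcc n, (if (e.1, e.2.1) = (u, v) then e.2.2 else 0) := by
      rw [← Finset.sum_add_distrib]
      refine Finset.sum_congr rfl (fun u _ => ?_)
      rw [← Finset.sum_add_distrib]
      exact Finset.sum_congr rfl (fun v _ => hsplit u v)
    rw [hstep]
    have hub : ∑ u ∈ pvIcc n, ∑ v ∈ pvIcc n, (if (e.1, e.2.1) = (u, v) then e.2.2 else 0)
        ≤ (e.2.2.natAbs : Int) := by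
      refine le_trans (Finset.sum_le_sum (fun u _ => Finset.sum_le_sum (fun v _ => ?_)))
        (pv_sum_pair_ite_le n (e.1, e.2.1) (e.2.2.natAbs : Int) (by positivity))
      split_ifs <;> omega
    simp only [List.map_cons, List.sum_cons]
    push_cast at ih hub ⊢
    omega


-- ---------- A-side BFS: success gives a positive simple path, failure a closed visited set ----------

def pvGood (n : Int) (g : List (List Int)) (vis : List Bool) (p : List Int) : Prop :=
  p.Nodup ∧ (∀ x ∈ p, pvInR n x ∧ PySem.List.pyGetD vis x false = true) ∧
  (∀ e ∈ pvPairs p, 0 < pvMatG g e.1 e.2)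

def pvQR (n : Int) (g : List (List Int)) (vis : List Bool) (par : List Int) (src : Int)
    (q : List Int) (ps : List (List Int)) : Prop :=
  List.Forall₂ (fun u p => pvParWalk par src u p ∧ pvGood n g vis p) q ps

theorem pv_forall₂_append {α β : Type} {R : α → β → Prop} {l1 l2 : List α} {r1 r2 : List β}
    (h1 : List.Forall₂ R l1 r1) (h2 : List.Forall₂ R l2 r2) :
    List.Forall₂ R (l1 ++ l2) (r1 ++ r2) := by
  induction h1 with
  | nil => simpa
  | cons h t ih => exact List.Forall₂.cons h ih

theorem pv_pyGetD_toNat {α : Type} (xs : List α) (j : Int) (d : α) (hj : 0 ≤ j) :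
    PySem.List.pyGetD xs j d = xs.getD j.toNat d := by
  have h : j = ((j.toNat : Nat) : Int) := by omega
  conv_lhs => rw [h]
  rw [PySem.List.pyGetD_natCast]

theorem pv_count_set_true : ∀ (l : List Bool) (i : Nat), i < l.length →
    l.getD i false = false → (l.set i true).count true = l.count true + 1 := by
  intro l
  induction l with
  | nil => intro i h; simp at h
  | cons b t ih =>
    intro i hi hg
    cases i with
    | zero =>
      simp only [List.getD_cons_zero] at hg
      subst hg
      simp [List.count_cons]
    | succ j =>
      simp only [List.getD_cons_succ] at hg
      simp only [List.length_cons, Nat.succ_lt_succ_iff] at hi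
      simp only [List.set_cons_succ, List.count_cons, ih j hi hg]
      omega

theorem pv_count_le_length (l : List Bool) : l.count true ≤ l.length :=
  List.count_le_length

theorem pv_scanA_spec (n : Int) (g : List (List Int)) (src snk : Int) (hsnkR : pvInR n snk) :
    ∀ (vvs : List Int), (∀ v ∈ vvs, pvInR n v) →
    ∀ (uu : Int) (pu : List Int) (vis : List Bool) (par : List Int) (q : List Int)
      (ps : List (List Int)),
      vis.length = n.toNat → par.length = n.toNat →
      pvQR n g vis par src q ps →
      (∀ x ∈ q, pvInR n x ∧ PySem.List.pyGetD vis x false = true) →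
      pvParWalk par src uu pu → pvGood n g vis pu →
      PySem.List.pyGetD vis src false = true →
      PySem.List.pyGetD vis snk false = false →
      ((pvScanA g snk uu vvs vis par q).1 = true →
          pvParWalk (pvScanA g snk uu vvs vis par q).2.2.1 src snk (pu ++ [snk]) ∧
          (pu ++ [snk]).Nodup ∧ (∀ x ∈ pu ++ [snk], pvInR n x) ∧
          (∀ e ∈ pvPairs (pu ++ [snk]), 0 < pvMatG g e.1 e.2)) ∧
      ((pvScanA g snk uu vvs vis par q).1 = false →
          (pvScanA g snk uu vvs vis par q).2.1.length = n.toNat ∧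
          (pvScanA g snk uu vvs vis par q).2.2.1.length = n.toNat ∧
          (∀ x : Int, pvInR n x → PySem.List.pyGetD vis x false = true →
            PySem.List.pyGetD (pvScanA g snk uu vvs vis par q).2.1 x false = true) ∧
          (∃ news : List Int, (pvScanA g snk uu vvs vis par q).2.2.2 = q ++ news ∧
            ((pvScanA g snk uu vvs vis par q).2.1.count true)
              = vis.count true + news.length) ∧
          (∃ ps', pvQR n g (pvScanA g snk uu vvs vis par q).2.1
            (pvScanA g snk uu vvs vis par q).2.2.1 src
            (pvScanA g snk uu vvs vis par q).2.2.2 ps') ∧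
          (∀ x ∈ (pvScanA g snk uu vvs vis par q).2.2.2, pvInR n x ∧
            PySem.List.pyGetD (pvScanA g snk uu vvs vis par q).2.1 x false = true) ∧
          (∀ v ∈ vvs, 0 < pvMatG g uu v →
            PySem.List.pyGetD (pvScanA g snk uu vvs vis par q).2.1 v false = true) ∧
          (∀ x : Int, pvInR n x →
            PySem.List.pyGetD (pvScanA g snk uu vvs vis par q).2.1 x false = true →
            PySem.List.pyGetD vis x false = true ∨ x ∈ (pvScanA g snk uu vvs vis par q).2.2.2) ∧
          PySem.List.pyGetD (pvScanA g snk uu vvs vis par q).2.1 src false = true ∧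
          PySem.List.pyGetD (pvScanA g snk uu vvs vis par q).2.1 snk false = false) := by
  intro vvs
  induction vvs with
  | nil =>
    intro _ uu pu vis par q ps hvisL hparL hQR hqok hwalk hgood hsrcvis hsnkF
    refine ⟨fun h => by simp [pvScanA] at h, fun _ => ?_⟩
    exact ⟨hvisL, hparL, fun x _ hx => hx, ⟨[], by simp [pvScanA], by simp [pvScanA]⟩, ⟨ps, hQR⟩, hqok,
      fun v hv => absurd hv (List.not_mem_nil), fun x _ hx => Or.inl hx, hsrcvis, hsnkF⟩
  | cons vv rest ih =>
    intro hvvs uu pu vis par q ps hvisL hparL hQR hqok hwalk hgood hsrcvis hsnkF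
    have hvvR : pvInR n vv := hvvs vv (List.mem_cons_self ..)
    have hrest : ∀ v ∈ rest, pvInR n v := fun v hv => hvvs v (List.mem_cons_of_mem _ hv)
    have huuR : pvInR n uu := (hgood.2.1 uu (pvParWalk_mem_last hwalk)).1
    rw [pvScanA]
    by_cases hcnd : (!(PySem.List.pyGetD vis vv false) && decide (0 < pvMatG g uu vv)) = true
    · rw [hcnd]
      simp only [if_true]
      have hvvunvis : PySem.List.pyGetD vis vv false = false := by
        rcases Bool.and_eq_true_iff.mp hcnd with ⟨h1, _⟩
        simpa using h1
      have hvvpos : 0 < pvMatG g uu vv := by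
        rcases Bool.and_eq_true_iff.mp hcnd with ⟨_, h2⟩
        simpa using h2
      have hsrcne : vv ≠ src := fun h => by rw [h, hsrcvis] at hvvunvis; cases hvvunvis
      have hvvnotpu : vv ∉ pu := fun hm => by
        have := (hgood.2.1 vv hm).2; rw [this] at hvvunvis; cases hvvunvis
      have hparL' : (PySem.List.pySetD par vv uu).length = n.toNat := by
        rw [PySem.List.length_pySetD]; exact hparL
      have hvisL' : (PySem.List.pySetD vis vv true).length = n.toNat := by
        rw [PySem.List.length_pySetD]; exact hvisL
      obtain ⟨hvv0, hvvn⟩ := hvvR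
      have hvvR : pvInR n vv := ⟨hvv0, hvvn⟩
      have hvvlt : vv.toNat < par.length := by rw [hparL]; omega
      have hvvltv : vv.toNat < vis.length := by rw [hvisL]; omega
      have hgetpar' : ∀ x : Int, 0 ≤ x →
          PySem.List.pyGetD (PySem.List.pySetD par vv uu) x (-1)
            = if x = vv then uu else PySem.List.pyGetD par x (-1) :=
        fun x hx => pv_getD_setD par vv x uu (-1) hvvR.1 hvvlt hx
      have hgetvis' : ∀ x : Int, 0 ≤ x →
          PySem.List.pyGetD (PySem.List.pySetD vis vv true) x false
            = if x = vv then true else PySem.List.pyGetD vis x false :=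
        fun x hx => pv_getD_setD vis vv x true false hvvR.1 hvvltv hx
      have hcount' : (PySem.List.pySetD vis vv true).count true = vis.count true + 1 := by
        rw [PySem.List.pySetD_of_nonneg (h := hvvR.1)]
        refine pv_count_set_true vis vv.toNat hvvltv ?_
        rw [← pv_pyGetD_toNat vis vv false hvvR.1]
        exact hvvunvis
      have hstable : ∀ (u0 : Int) (p0 : List Int), pvParWalk par src u0 p0 →
          pvGood n g vis p0 → pvParWalk (PySem.List.pySetD par vv uu) src u0 p0 := by
        intro u0 p0 hw hg0
        refine pvParWalk_stable hw ?_
        intro x hx _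
        have hxR := (hg0.2.1 x hx).1
        rw [hgetpar' x hxR.1, if_neg ?_]
        intro hxe
        have := (hg0.2.1 x hx).2
        rw [hxe] at this
        rw [this] at hvvunvis; cases hvvunvis
      have hgoodmono : ∀ p0 : List Int, pvGood n g vis p0 →
          pvGood n g (PySem.List.pySetD vis vv true) p0 := by
        intro p0 hg0
        refine ⟨hg0.1, fun x hx => ⟨(hg0.2.1 x hx).1, ?_⟩, hg0.2.2⟩
        rw [hgetvis' x (hg0.2.1 x hx).1.1]
        by_cases hxv : x = vv
        · rw [if_pos hxv]
        · rw [if_neg hxv]; exact (hg0.2.1 x hx).2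
      have hnewnodup : (pu ++ [vv]).Nodup := by
        rw [List.nodup_append]
        refine ⟨hgood.1, List.nodup_singleton _, ?_⟩
        intro x hx b hb
        rw [List.mem_singleton] at hb
        subst hb
        intro he; exact hvvnotpu (he ▸ hx)
      have hnewpairs : pvPairs (pu ++ [vv]) = pvPairs pu ++ [(uu, vv)] := by
        rcases pvParWalk_last hwalk with ⟨q0, hq0⟩
        rw [hq0, pvPairs_snoc, ← hq0]
      have hnewpos : ∀ e ∈ pvPairs (pu ++ [vv]), 0 < pvMatG g e.1 e.2 := by
        intro e he
        rw [hnewpairs] at he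
        rcases List.mem_append.mp he with h | h
        · exact hgood.2.2 e h
        · rw [List.mem_singleton] at h
          subst h
          exact hvvpos
      have hnewwalk : pvParWalk (PySem.List.pySetD par vv uu) src vv (pu ++ [vv]) := by
        refine pvParWalk.step hsrcne ?_
        rw [hgetpar' vv hvvR.1, if_pos rfl]
        exact hstable uu pu hwalk hgood
      by_cases hsnkc : (vv == snk) = true
      · have hvvsnk : vv = snk := by simpa using hsnkc
        rw [if_pos hsnkc]
        subst hvvsnk
        refine ⟨fun _ => ?_, fun h => by simp at h⟩
        refine ⟨hnewwalk, hnewnodup, ?_, hnewpos⟩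
        intro x hx
        rcases List.mem_append.mp hx with h | h
        · exact (hgood.2.1 x h).1
        · rw [List.mem_singleton] at h; subst h; exact hvvR
      · rw [if_neg (by simpa using hsnkc)]
        have hvvnesnk : vv ≠ snk := by simpa using hsnkc
        have hnewgood : pvGood n g (PySem.List.pySetD vis vv true) (pu ++ [vv]) := by
          refine ⟨hnewnodup, ?_, hnewpos⟩
          intro x hx
          rcases List.mem_append.mp hx with h | h
          · refine ⟨(hgood.2.1 x h).1, ?_⟩
            rw [hgetvis' x (hgood.2.1 x h).1.1]
            by_cases hxv : x = vv
            · rw [if_pos hxv]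
            · rw [if_neg hxv]; exact (hgood.2.1 x h).2
          · rw [List.mem_singleton] at h
            subst h
            exact ⟨hvvR, by rw [hgetvis' x hvvR.1, if_pos rfl]⟩
        have hQR' : pvQR n g (PySem.List.pySetD vis vv true) (PySem.List.pySetD par vv uu)
            src (q ++ [vv]) (ps ++ [pu ++ [vv]]) := by
          refine pv_forall₂_append ?_ ?_
          · refine List.Forall₂.imp ?_ hQR
            intro u0 p0 hp
            exact ⟨hstable u0 p0 hp.1 hp.2, hgoodmono p0 hp.2⟩
          · exact List.forall₂_cons.mpr ⟨⟨hnewwalk, hnewgood⟩, List.Forall₂.nil⟩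
        have hqok' : ∀ x ∈ q ++ [vv], pvInR n x ∧
            PySem.List.pyGetD (PySem.List.pySetD vis vv true) x false = true := by
          intro x hx
          rcases List.mem_append.mp hx with h | h
          · refine ⟨(hqok x h).1, ?_⟩
            rw [hgetvis' x (hqok x h).1.1]
            by_cases hxv : x = vv
            · rw [if_pos hxv]
            · rw [if_neg hxv]; exact (hqok x h).2
          · rw [List.mem_singleton] at h
            subst h
            exact ⟨hvvR, by rw [hgetvis' x hvvR.1, if_pos rfl]⟩
        have hsrc' : PySem.List.pyGetD (PySem.List.pySetD vis vv true) src false = true := by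
          have hsrcmem : src ∈ pu := pvParWalk_src_mem hwalk
          rw [hgetvis' src (hgood.2.1 src hsrcmem).1.1, if_neg (fun h => hsrcne h.symm)]
          exact hsrcvis
        have hsnk' : PySem.List.pyGetD (PySem.List.pySetD vis vv true) snk false = false := by
          rw [hgetvis' snk hsnkR.1, if_neg (fun h => hvvnesnk h.symm)]
          exact hsnkF
        have hrec := ih hrest uu pu (PySem.List.pySetD vis vv true)
          (PySem.List.pySetD par vv uu) (q ++ [vv]) (ps ++ [pu ++ [vv]])
          hvisL' hparL' hQR' hqok' (hstable uu pu hwalk hgood) (hgoodmono pu hgood)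
          hsrc' hsnk'
        refine ⟨hrec.1, fun hf => ?_⟩
        obtain ⟨c1, c2, c3, ⟨news, hnews, hcnt⟩, c5, c6, c7, c8, c9, c10⟩ := hrec.2 hf
        refine ⟨c1, c2, ?_, ?_, c5, c6, ?_, ?_, c9, c10⟩
        · intro x hxR hxv
          refine c3 x hxR ?_
          rw [hgetvis' x hxR.1]
          by_cases hxvv : x = vv
          · rw [if_pos hxvv]
          · rw [if_neg hxvv]; exact hxv
        · refine ⟨vv :: news, ?_, ?_⟩
          · rw [hnews, List.append_assoc]
            rfl
          · rw [hcnt, hcount', List.length_cons]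
            omega
        · intro v hv hpos
          rcases List.mem_cons.mp hv with he | ht
          · subst he
            refine c3 v hvvR ?_
            rw [hgetvis' v hvvR.1, if_pos rfl]
          · exact c7 v ht hpos
        · intro x hxR hxv
          rcases c8 x hxR hxv with h | h
          · rw [hgetvis' x hxR.1] at h
            by_cases hxvv : x = vv
            · subst hxvv
              right
              rw [hnews]
              simp
            · rw [if_neg hxvv] at h
              exact Or.inl h
          · exact Or.inr h
    · rw [Bool.not_eq_true] at hcnd
      rw [hcnd]
      simp only [Bool.false_eq_true, if_false]
      have hrec := ih hrest uu pu vis par q ps hvisL hparL hQR hqok hwalk hgood hsrcvis hsnkF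
      refine ⟨hrec.1, fun hf => ?_⟩
      obtain ⟨c1, c2, c3, c4, c5, c6, c7, c8, c9, c10⟩ := hrec.2 hf
      refine ⟨c1, c2, c3, c4, c5, c6, ?_, c8, c9, c10⟩
      intro v hv hpos
      rcases List.mem_cons.mp hv with he | ht
      · subst he
        by_cases hvis : PySem.List.pyGetD vis v false = true
        · exact c3 v hvvR hvis
        · rw [Bool.not_eq_true] at hvis
          rw [hvis] at hcnd
          simp at hcnd
          exact absurd hpos (by omega)
      · exact c7 v ht hpos


theorem pv_bfsA_spec (n : Int) (g : List (List Int)) (src snk : Int) (hsnkR : pvInR n snk) :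
    ∀ (fuel : Nat) (vis : List Bool) (par : List Int) (q : List Int) (ps : List (List Int)),
      vis.length = n.toNat → par.length = n.toNat →
      pvQR n g vis par src q ps →
      (∀ x ∈ q, pvInR n x ∧ PySem.List.pyGetD vis x false = true) →
      (∀ u : Int, pvInR n u → PySem.List.pyGetD vis u false = true →
        u ∈ q ∨ ∀ v : Int, pvInR n v → 0 < pvMatG g u v →
          PySem.List.pyGetD vis v false = true) →
      PySem.List.pyGetD vis src false = true →
      PySem.List.pyGetD vis snk false = false →
      q.length + (n.toNat - vis.count true) < fuel →
      ((pvBfsA n g snk fuel vis par q).1 = true →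
        ∃ p, pvParWalk (pvBfsA n g snk fuel vis par q).2 src snk p ∧
          p.Nodup ∧ (∀ x ∈ p, pvInR n x) ∧ (∀ e ∈ pvPairs p, 0 < pvMatG g e.1 e.2) ∧
          p.head? = some src ∧ p.getLast? = some snk) ∧
      ((pvBfsA n g snk fuel vis par q).1 = false →
        ∃ vis' : List Bool,
          PySem.List.pyGetD vis' src false = true ∧
          PySem.List.pyGetD vis' snk false = false ∧
          (∀ u : Int, pvInR n u → PySem.List.pyGetD vis' u false = true →
            ∀ v : Int, pvInR n v → 0 < pvMatG g u v →
              PySem.List.pyGetD vis' v false = true)) := by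
  intro fuel
  induction fuel with
  | zero =>
    intro vis par q ps _ _ _ _ _ _ _ hfuel
    exact absurd hfuel (by omega)
  | succ fuel ihf =>
    intro vis par q ps hvisL hparL hQR hqok hCE hsrcvis hsnkF hfuel
    cases hq : q with
    | nil =>
      subst hq
      constructor
      · intro h; rw [pvBfsA] at h; simp at h
      · intro _
        refine ⟨vis, hsrcvis, hsnkF, ?_⟩
        intro u huR huvis v hvR hpos
        rcases hCE u huR huvis with h | h
        · exact absurd h (List.not_mem_nil)
        · exact h v hvR hpos
    | cons uu qrest =>
      subst hq
      rcases hQRc : ps with _ | ⟨pu, psrest⟩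
      · subst hQRc; cases hQR
      · subst hQRc
        obtain ⟨⟨hwalk, hgood⟩, hQRrest⟩ := List.forall₂_cons.mp hQR
        have hqokrest : ∀ x ∈ qrest, pvInR n x ∧ PySem.List.pyGetD vis x false = true :=
          fun x hx => hqok x (List.mem_cons_of_mem _ hx)
        have hvvs : ∀ v ∈ PySem.List.pyRange 0 n 1, pvInR n v := by
          intro v hv
          have := PySem.List.mem_pyRange_one.mp hv
          exact ⟨this.1, this.2⟩
        have hscan := pv_scanA_spec n g src snk hsnkR (PySem.List.pyRange 0 n 1) hvvs
          uu pu vis par qrest psrest hvisL hparL hQRrest hqokrest hwalk hgood hsrcvis hsnkF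
        rcases hS : pvScanA g snk uu (PySem.List.pyRange 0 n 1) vis par qrest
          with ⟨b, vis', par', q'⟩
        rw [hS] at hscan
        cases b with
        | true =>
          obtain ⟨hwalk', hnd', hrange', hpos'⟩ := hscan.1 rfl
          constructor
          · intro _
            rw [pvBfsA, hS]
            refine ⟨pu ++ [snk], by simpa using hwalk', hnd', hrange', hpos', ?_, ?_⟩
            · have hh := pvParWalk_head hwalk'
              simpa using hh
            · exact List.getLast?_concat
          · intro h
            rw [pvBfsA, hS] at h
            simp at h
        | false =>
          obtain ⟨c1, c2, c3, ⟨news, hnews, hcnt⟩, ⟨ps', hQR'⟩, c6, c7, c8, c9, c10⟩ :=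
            hscan.2 rfl
          simp only at c1 c2 c3 hnews hcnt hQR' c6 c7 c8 c9 c10
          have hAeq : pvBfsA n g snk (fuel + 1) vis par (uu :: qrest)
              = pvBfsA n g snk fuel vis' par' q' := by
            rw [pvBfsA, hS]
          have hCE' : ∀ u : Int, pvInR n u → PySem.List.pyGetD vis' u false = true →
              u ∈ q' ∨ ∀ v : Int, pvInR n v → 0 < pvMatG g u v →
                PySem.List.pyGetD vis' v false = true := by
            intro u huR huvis
            rcases c8 u huR huvis with hold | hnew
            · rcases hCE u huR hold with hq | hcl
              · rcases List.mem_cons.mp hq with he | ht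
                · subst he
                  right
                  intro v hvR hpos
                  refine c7 v ?_ hpos
                  rw [PySem.List.mem_pyRange_one]
                  exact ⟨hvR.1, hvR.2⟩
                · left
                  rw [hnews]
                  exact List.mem_append.mpr (Or.inl ht)
              · right
                intro v hvR hpos
                exact c3 v hvR (hcl v hvR hpos)
            · exact Or.inl hnew
          have hcnt' : vis'.count true ≤ n.toNat := by
            have := pv_count_le_length vis'
            omega
          have hfuel' : q'.length + (n.toNat - vis'.count true) < fuel := by
            rw [hnews, List.length_append, hcnt]
            have hc0 : vis.count true + news.length ≤ n.toNat := by rw [← hcnt]; exact hcnt'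
            simp only [List.length_cons] at hfuel
            omega
          have hrec := ihf vis' par' q' ps' c1 c2 hQR' c6 hCE' c9 c10 hfuel'
          rw [hAeq]
          exact hrec

theorem pv_ekA_isMax (n : Int) (c : Int → Int → Int) (src snk : Int)
    (hsrcI : src ∈ pvIcc n) (hsnkI : snk ∈ pvIcc n) (hst : src ≠ snk)
    (hc : ∀ u ∈ pvIcc n, ∀ v ∈ pvIcc n, 0 ≤ c u v) :
    ∀ (fuel : Nat) (g : List (List Int)) (fl : Int),
      pvWFG n g → pvValid n c src snk (fun u v => pvMatG g u v) fl →
      (∑ u ∈ pvIcc n, ∑ v ∈ pvIcc n, c u v) - fl < (fuel : Int) →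
      pvIsMax n c src snk (pvEkA n src snk fuel g fl) := by
  have hsrcR : pvInR n src := pv_mem_Icc.mp hsrcI
  have hsnkR : pvInR n snk := pv_mem_Icc.mp hsnkI
  intro fuel
  induction fuel with
  | zero =>
    intro g fl _ hV hfuel
    have := pv_fl_le_total hV hc hsrcI hsnkI hst
    simp only [Nat.cast_zero] at hfuel
    omega
  | succ fuel ihf =>
    intro g fl hWF hV hfuel
    have hn1 : 1 ≤ n.toNat := by
      have := pv_mem_Icc.mp hsrcI
      rcases this with ⟨h1, h2⟩
      omega
    set vis0 := PySem.List.pySetD (List.replicate n.toNat false) src true with hvis0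
    have hvisL0 : vis0.length = n.toNat := by
      rw [hvis0, PySem.List.length_pySetD, List.length_replicate]
    have hsrclt : src.toNat < (List.replicate n.toNat false).length := by
      rw [List.length_replicate]; rcases hsrcR with ⟨h1, h2⟩; omega
    have hget0 : ∀ x : Int, 0 ≤ x →
        PySem.List.pyGetD vis0 x false
          = if x = src then true else PySem.List.pyGetD (List.replicate n.toNat false) x false :=
      fun x hx => pv_getD_setD _ src x true false hsrcR.1 hsrclt hx
    have hsrc0 : PySem.List.pyGetD vis0 src false = true := by
      rw [hget0 src hsrcR.1, if_pos rfl]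
    have hsnk0 : PySem.List.pyGetD vis0 snk false = false := by
      rw [hget0 snk hsnkR.1, if_neg (fun h => hst h.symm)]
      exact pv_getD_replicate n.toNat false false snk hsnkR.1
        (by rcases hsnkR with ⟨h1, h2⟩; omega)
    have hcnt0 : vis0.count true = 1 := by
      rw [hvis0, PySem.List.pySetD_of_nonneg (h := hsrcR.1)]
      rw [pv_count_set_true (List.replicate n.toNat false) src.toNat
        (by rw [List.length_replicate]; rcases hsrcR with ⟨h1, h2⟩; omega)
        (by simp [List.getD_replicate])]
      simp [List.count_replicate]
    have hgood0 : pvGood n g vis0 [src] := by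
      refine ⟨List.nodup_singleton _, ?_, ?_⟩
      · intro x hx
        rw [List.mem_singleton] at hx
        subst hx
        exact ⟨hsrcR, hsrc0⟩
      · intro e he
        simp [pvPairs_single] at he
    have hQR0 : pvQR n g vis0 (List.replicate n.toNat (-1)) src [src] [[src]] :=
      List.forall₂_cons.mpr ⟨⟨pvParWalk.base, hgood0⟩, List.Forall₂.nil⟩
    have hqok0 : ∀ x ∈ [src], pvInR n x ∧ PySem.List.pyGetD vis0 x false = true := by
      intro x hx
      rw [List.mem_singleton] at hx
      subst hx
      exact ⟨hsrcR, hsrc0⟩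
    have hCE0 : ∀ u : Int, pvInR n u → PySem.List.pyGetD vis0 u false = true →
        u ∈ [src] ∨ ∀ v : Int, pvInR n v → 0 < pvMatG g u v →
          PySem.List.pyGetD vis0 v false = true := by
      intro u huR huvis
      left
      rw [hget0 u huR.1] at huvis
      by_cases hus : u = src
      · rw [hus]; exact List.mem_singleton_self _
      · rw [if_neg hus] at huvis
        rw [pv_getD_replicate n.toNat false false u huR.1
          (by rcases huR with ⟨h1, h2⟩; omega)] at huvis
        cases huvis
    have hfuel0 : [src].length + (n.toNat - vis0.count true) < n.toNat + 1 := by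
      rw [hcnt0]
      simp only [List.length_singleton]
      omega
    have hbfs := pv_bfsA_spec n g src snk hsnkR (n.toNat + 1) vis0
      (List.replicate n.toNat (-1)) [src] [[src]] hvisL0 (List.length_replicate)
      hQR0 hqok0 hCE0 hsrc0 hsnk0 hfuel0
    rcases hres : pvBfsA n g snk (n.toNat + 1) vis0 (List.replicate n.toNat (-1)) [src]
      with ⟨found, par'⟩
    rw [hres] at hbfs
    cases found with
    | false =>
      obtain ⟨vis', hsrc', hsnk', hclosed⟩ := hbfs.2 rfl
      have hEk : pvEkA n src snk (fuel + 1) g fl = fl := by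
        rw [pvEkA, hvis0] at *
        rw [hres]
      rw [hEk]
      set S : Finset Int := (pvIcc n).filter
        (fun v => PySem.List.pyGetD vis' v false = true) with hSdef
      have hSsub : S ⊆ pvIcc n := Finset.filter_subset _ _
      have hsS : src ∈ S := Finset.mem_filter.mpr ⟨hsrcI, hsrc'⟩
      have htS : snk ∉ S := by
        intro h
        have := (Finset.mem_filter.mp h).2
        rw [hsnk'] at this
        cases this
      have hzero : ∀ u ∈ S, ∀ v ∈ pvIcc n \ S, pvMatG g u v = 0 := by
        intro u hu v hv
        obtain ⟨huI, huvis⟩ := Finset.mem_filter.mp hu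
        obtain ⟨hvI, hvS⟩ := Finset.mem_sdiff.mp hv
        have h2 : 0 ≤ pvMatG g u v := hV.2.1 u huI v hvI
        by_contra hne
        have hpos : 0 < pvMatG g u v := by omega
        have := hclosed u (pv_mem_Icc.mp huI) huvis v (pv_mem_Icc.mp hvI) hpos
        exact hvS (Finset.mem_filter.mpr ⟨hvI, this⟩)
      refine ⟨⟨fun u v => pvMatG g u v, hV⟩, ?_⟩
      intro y ρ' hV'
      have h1 := pv_value_eq_cap hV S hSsub hsS hsnkI htS hzero
      have h2 := pv_value_le hV' S hSsub hsS hsnkI htS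
      omega
    | true =>
      obtain ⟨p, hwalk, hnd, hrange, hpos, hhead, hlast⟩ := hbfs.1 rfl
      simp only at hwalk
      have hplen : p.length ≤ n.toNat + 1 := by
        have := pv_nodup_len n p hnd hrange
        omega
      have hpairs_ne : pvPairs p ≠ [] := by
        cases p with
        | nil => simp at hhead
        | cons a l =>
          cases l with
          | nil =>
            have ha : a = src := by simpa using hhead
            have hb : a = snk := by simpa using hlast
            exact absurd (ha ▸ hb) hst
          | cons b l2 => rw [pvPairs_cons_cons]; simp
      have hpfA : pvWalkMin g par' src (n.toNat + 1) snk none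
          = ((pvPairs p).map (fun e => pvMatG g e.1 e.2)).min? := by
        have hw2 : pvParWalk par' src snk p := hwalk
        have hlast2 : ∃ q0, p = q0 ++ [snk] := pvParWalk_last hw2
        rw [pv_walkMin_eq g hw2 (n.toNat + 1) hplen none,
          pv_foldl_omin_none, pv_min?_reverse]
      obtain ⟨m, hm⟩ : ∃ m, ((pvPairs p).map (fun e => pvMatG g e.1 e.2)).min? = some m := by
        cases hmm : ((pvPairs p).map (fun e => pvMatG g e.1 e.2)).min? with
        | none =>
          rw [List.min?_eq_none_iff] at hmm
          simp at hmm
          exact absurd hmm hpairs_ne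
        | some m => exact ⟨m, rfl⟩
      obtain ⟨hmmem, hmle⟩ := List.min?_eq_some_iff.mp hm
      obtain ⟨e0, he0, he0v⟩ := List.mem_map.mp hmmem
      have hm1 : 1 ≤ m := by
        have := hpos e0 he0
        omega
      set pf := (pvWalkMin g par' src (n.toNat + 1) snk none).getD 0 with hpfdef
      have hpfm : pf = m := by rw [hpfdef, hpfA, hm]; rfl
      have hupd := pv_walkUpd_spec n pf hwalk hnd hrange (n.toNat + 1) hplen g hWF
      have hEk : pvEkA n src snk (fuel + 1) g fl
          = pvEkA n src snk fuel (pvWalkUpd par' src pf (n.toNat + 1) snk g) (fl + pf) := by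
        rw [pvEkA, hvis0] at *
        rw [hres]
      rw [hEk]
      have hV' : pvValid n c src snk
          (fun u v => pvMatG (pvWalkUpd par' src pf (n.toNat + 1) snk g) u v) (fl + pf) := by
        refine pv_aug hV hnd (fun x hx => pv_mem_Icc.mpr (hrange x hx)) hhead hlast hst
          (by omega) ?_ ?_
        · intro e he
          have := hmle (pvMatG g e.1 e.2) (List.mem_map.mpr ⟨e, he, rfl⟩)
          omega
        · intro u hu v hv
          exact hupd.2 u v (pv_mem_Icc.mp hu) (pv_mem_Icc.mp hv)
      refine ihf (pvWalkUpd par' src pf (n.toNat + 1) snk g) (fl + pf) hupd.1 hV' ?_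
      push_cast
      push_cast at hfuel
      omega


-- ---------- B-side DFS: success gives a positive simple path, failure a closed seen set ----------

theorem pv_dfsB_spec (n : Int) (r : PySem.Dict (Int × Int) Int) (snk : Int)
    (hsnkR : pvInR n snk) :
    ∀ (fuel : Nat) (u : Int) (seen : PySem.Set Int),
      pvInR n u → u ∈ seen → (∀ x ∈ seen, pvInR n x) → seen.Nodup →
      (u ≠ snk → snk ∉ seen) →
      n.toNat < fuel + seen.length →
      (∀ (p : List Int) (seen' : PySem.Set Int),
        pvDfsB n r snk fuel u seen = (some p, seen') →
        p.head? = some u ∧ p.getLast? = some snk ∧ p.Nodup ∧ (∀ x ∈ p, pvInR n x) ∧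
        (∀ e ∈ pvPairs p, 0 < r.getD e 0) ∧ (∀ x ∈ p.tail, x ∉ seen)) ∧
      (∀ seen' : PySem.Set Int,
        pvDfsB n r snk fuel u seen = (none, seen') →
        (∀ x ∈ seen, x ∈ seen') ∧ (∀ x ∈ seen', pvInR n x) ∧ seen'.Nodup ∧
        seen.length ≤ seen'.length ∧ snk ∉ seen' ∧
        (∀ w : Int, ((w ∈ seen' ∧ w ∉ seen) ∨ w = u) →
          ∀ v : Int, pvInR n v → 0 < r.getD (w, v) 0 → v ∈ seen')) := by
  intro fuel
  induction fuel with
  | zero =>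
    intro u seen huR hu hseenR hnd husnk hfuel
    have := pv_nodup_len n seen hnd hseenR
    omega
  | succ fuel ihf =>
    intro u seen huR hu hseenR hnd husnk hfuel
    by_cases hus : u = snk
    · subst hus
      rw [pvDfsB, if_pos (by simp)]
      constructor
      · intro p seen' hp
        obtain ⟨hp1, hp2⟩ := Prod.mk.injEq .. ▸ hp
        cases hp1
        exact ⟨rfl, rfl, List.nodup_singleton _, by simpa using huR,
          by simp [pvPairs_single], by simp⟩
      · intro seen' hnone
        exact absurd (Prod.mk.injEq .. ▸ hnone).1 (by simp)
    · rw [pvDfsB, if_neg (by simpa using hus)]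
      -- inner scan spec, by induction on the remaining vertex list
      have hscan : ∀ (vs : List Int), (∀ v ∈ vs, pvInR n v) →
          ∀ (seen1 : PySem.Set Int), u ∈ seen1 → (∀ x ∈ seen1, pvInR n x) → seen1.Nodup →
          snk ∉ seen1 → seen.length ≤ seen1.length →
          (∀ (p : List Int) (seen' : PySem.Set Int),
            pvDfsScanB n r snk fuel u vs seen1 = (some p, seen') →
            p.head? = some u ∧ p.getLast? = some snk ∧ p.Nodup ∧ (∀ x ∈ p, pvInR n x) ∧
            (∀ e ∈ pvPairs p, 0 < r.getD e 0) ∧ (∀ x ∈ p.tail, x ∉ seen1)) ∧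
          (∀ seen' : PySem.Set Int,
            pvDfsScanB n r snk fuel u vs seen1 = (none, seen') →
            (∀ x ∈ seen1, x ∈ seen') ∧ (∀ x ∈ seen', pvInR n x) ∧ seen'.Nodup ∧
            seen1.length ≤ seen'.length ∧ snk ∉ seen' ∧
            (∀ v ∈ vs, 0 < r.getD (u, v) 0 → v ∈ seen') ∧
            (∀ w : Int, w ∈ seen' → w ∉ seen1 →
              ∀ v : Int, pvInR n v → 0 < r.getD (w, v) 0 → v ∈ seen')) := by
        intro vs
        induction vs with
        | nil =>
          intro _ seen1 hu1 h1R h1nd h1snk h1len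
          constructor
          · intro p seen' hp
            rw [pvDfsScanB] at hp
            exact absurd (Prod.mk.injEq .. ▸ hp).1 (by simp)
          · intro seen' hnone
            rw [pvDfsScanB] at hnone
            obtain ⟨h1, h2⟩ := Prod.mk.injEq .. ▸ hnone
            subst h2
            exact ⟨fun x hx => hx, h1R, h1nd, le_refl _, h1snk,
              fun v hv => absurd hv (List.not_mem_nil),
              fun w hw hwn => absurd hw hwn⟩
        | cons v vs ih2 =>
          intro hvsR seen1 hu1 h1R h1nd h1snk h1len
          have hvR : pvInR n v := hvsR v (List.mem_cons_self ..)
          have hvsR' : ∀ x ∈ vs, pvInR n x := fun x hx => hvsR x (List.mem_cons_of_mem _ hx)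
          rw [pvDfsScanB]
          by_cases hcond : (!(PySem.Set.contains seen1 v) && decide (0 < r.getD (u, v) 0)) = true
          · rw [hcond]
            simp only [if_true]
            have hvnew : v ∉ seen1 := by
              rcases Bool.and_eq_true_iff.mp hcond with ⟨h1, _⟩
              intro hmem
              rw [(PySem.Set.contains_iff seen1 v).mpr hmem] at h1
              cases h1
            have hvpos : 0 < r.getD (u, v) 0 := by
              rcases Bool.and_eq_true_iff.mp hcond with ⟨_, h2⟩
              simpa using h2
            have haddlen : (PySem.Set.add seen1 v).length = seen1.length + 1 := by
              rw [PySem.Set.add_of_not_mem hvnew, List.length_append]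
              rfl
            have haddmem : ∀ y : Int, y ∈ PySem.Set.add seen1 v ↔ (y ∈ seen1 ∨ y = v) :=
              fun y => PySem.Set.mem_add ..
            have haddR : ∀ x ∈ PySem.Set.add seen1 v, pvInR n x := by
              intro x hx
              rcases (haddmem x).mp hx with h | h
              · exact h1R x h
              · exact h ▸ hvR
            have haddnd : (PySem.Set.add seen1 v).Nodup := PySem.Set.nodup_add seen1 v h1nd
            have hsub := ihf v (PySem.Set.add seen1 v) hvR
              ((haddmem v).mpr (Or.inr rfl)) haddR haddnd
              (fun hvsnk => fun hmem => by
                rcases (haddmem snk).mp hmem with h | h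
                · exact h1snk h
                · exact hvsnk h.symm)
              (by rw [haddlen]; omega)
            rcases hres : pvDfsB n r snk fuel v (PySem.Set.add seen1 v) with ⟨ob, seen2⟩
            cases ob with
            | some p2 =>
              simp only
              obtain ⟨hp2h, hp2l, hp2nd, hp2R, hp2pos, hp2tl⟩ := hsub.1 p2 seen2 hres
              obtain ⟨p2t, rfl⟩ : ∃ t, p2 = v :: t := by
                cases p2 with
                | nil => simp at hp2h
                | cons a t => exact ⟨t, by rw [show a = v by simpa using hp2h]⟩
              constructor
              · intro p seen' hp
                obtain ⟨hpe, hse⟩ := Prod.mk.injEq .. ▸ hp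
                cases hpe
                subst hse
                refine ⟨rfl, ?_, ?_, ?_, ?_, ?_⟩
                · rw [List.getLast?_cons_cons]
                  exact hp2l
                · rw [List.nodup_cons]
                  refine ⟨?_, hp2nd⟩
                  intro hmem
                  rcases List.mem_cons.mp hmem with h | h
                  · exact hvnew (h ▸ hu1)
                  · exact hp2tl u h ((haddmem u).mpr (Or.inl hu1))
                · intro x hx
                  rcases List.mem_cons.mp hx with h | h
                  · exact h ▸ huR
                  · exact hp2R x h
                · intro e he
                  rw [pvPairs_cons_cons] at he
                  rcases List.mem_cons.mp he with h | h
                  · subst h; exact hvpos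
                  · exact hp2pos e h
                · intro x hx
                  simp only [List.tail_cons] at hx
                  rcases List.mem_cons.mp hx with h | h
                  · exact h ▸ hvnew
                  · intro hmem
                    exact hp2tl x h ((haddmem x).mpr (Or.inl hmem))
              · intro seen' hnone
                exact absurd (Prod.mk.injEq .. ▸ hnone).1 (by simp)
            | none =>
              simp only
              obtain ⟨hs2sub, hs2R, hs2nd, hs2len, hs2snk, hs2cl⟩ := hsub.2 seen2 hres
              have hu2 : u ∈ seen2 := hs2sub u ((haddmem u).mpr (Or.inl hu1))
              have h12 : ∀ x ∈ seen1, x ∈ seen2 :=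
                fun x hx => hs2sub x ((haddmem x).mpr (Or.inl hx))
              have hlen2 : seen.length ≤ seen2.length := by
                rw [haddlen] at hs2len
                omega
              have hrec := ih2 hvsR' seen2 hu2 hs2R hs2nd hs2snk hlen2
              constructor
              · intro p seen' hp
                obtain ⟨c1, c2, c3, c4, c5, c6⟩ := hrec.1 p seen' hp
                exact ⟨c1, c2, c3, c4, c5, fun x hx hmem => c6 x hx (h12 x hmem)⟩
              · intro seen' hnone
                obtain ⟨d1, d2, d3, d4, d5, d6, d7⟩ := hrec.2 seen' hnone
                refine ⟨fun x hx => d1 x (h12 x hx), d2, d3, ?_, d5, ?_, ?_⟩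
                · rw [haddlen] at hs2len; omega
                · intro v' hv' hpos'
                  rcases List.mem_cons.mp hv' with h | h
                  · subst h
                    exact d1 v' (hs2sub v' ((haddmem v').mpr (Or.inr rfl)))
                  · exact d6 v' h hpos'
                · intro w hw hwn1 v' hv'R hpos'
                  by_cases hw2 : w ∈ seen2
                  · by_cases hwadd : w ∈ PySem.Set.add seen1 v
                    · rcases (haddmem w).mp hwadd with h | h
                      · exact absurd h hwn1
                      · subst h
                        exact d1 v' (hs2cl w (Or.inr rfl) v' hv'R hpos')
                    · exact d1 v' (hs2cl w (Or.inl ⟨hw2, hwadd⟩) v' hv'R hpos')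
                  · exact d7 w hw hw2 v' hv'R hpos'
          · rw [Bool.not_eq_true] at hcond
            rw [hcond]
            simp only [Bool.false_eq_true, if_false]
            have hrec := ih2 hvsR' seen1 hu1 h1R h1nd h1snk h1len
            refine ⟨hrec.1, ?_⟩
            intro seen' hnone
            obtain ⟨d1, d2, d3, d4, d5, d6, d7⟩ := hrec.2 seen' hnone
            refine ⟨d1, d2, d3, d4, d5, ?_, d7⟩
            intro v' hv' hpos'
            rcases List.mem_cons.mp hv' with h | h
            · subst h
              by_cases hvin : v' ∈ seen1
              · exact d1 v' hvin
              · exfalso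
                have : PySem.Set.contains seen1 v' = false := by
                  rcases hc : PySem.Set.contains seen1 v' with _ | _
                  · rfl
                  · exact absurd ((PySem.Set.contains_iff _ _).mp hc) hvin
                rw [this] at hcond
                simp at hcond
                omega
            · exact d6 v' h hpos'
      have hvvs : ∀ v ∈ PySem.List.pyRange 0 n 1, pvInR n v := by
        intro v hv
        have := PySem.List.mem_pyRange_one.mp hv
        exact ⟨this.1, this.2⟩
      have hmain := hscan (PySem.List.pyRange 0 n 1) hvvs seen hu hseenR hnd
        (husnk hus) (le_refl _)
      constructor
      · exact hmain.1
      · intro seen' hnone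
        obtain ⟨d1, d2, d3, d4, d5, d6, d7⟩ := hmain.2 seen' hnone
        refine ⟨d1, d2, d3, d4, d5, ?_⟩
        intro w hw v hvR hpos
        rcases hw with ⟨hw1, hw2⟩ | hwu
        · exact d7 w hw1 hw2 v hvR hpos
        · subst hwu
          refine d6 v ?_ hpos
          rw [PySem.List.mem_pyRange_one]
          exact ⟨hvR.1, hvR.2⟩


theorem pv_ffB_isMax (n : Int) (c : Int → Int → Int) (src snk : Int)
    (hsrcI : src ∈ pvIcc n) (hsnkI : snk ∈ pvIcc n) (hst : src ≠ snk)
    (hc : ∀ u ∈ pvIcc n, ∀ v ∈ pvIcc n, 0 ≤ c u v) :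
    ∀ (fuel : Nat) (r : PySem.Dict (Int × Int) Int) (fl : Int),
      pvValid n c src snk (fun u v => r.getD (u, v) 0) fl →
      (∑ u ∈ pvIcc n, ∑ v ∈ pvIcc n, c u v) - fl < (fuel : Int) →
      pvIsMax n c src snk (pvFFB n src snk fuel r fl) := by
  have hsrcR : pvInR n src := pv_mem_Icc.mp hsrcI
  have hsnkR : pvInR n snk := pv_mem_Icc.mp hsnkI
  intro fuel
  induction fuel with
  | zero =>
    intro r fl hV hfuel
    have := pv_fl_le_total hV hc hsrcI hsnkI hst
    simp only [Nat.cast_zero] at hfuel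
    omega
  | succ fuel ihf =>
    intro r fl hV hfuel
    have hseen0 : PySem.Set.add PySem.Set.empty src = [src] := rfl
    have hdfs := pv_dfsB_spec n r snk hsnkR (n.toNat + 1) src
      (PySem.Set.add PySem.Set.empty src) hsrcR
      (by rw [hseen0]; exact List.mem_singleton_self _)
      (by rw [hseen0]; intro x hx; rw [List.mem_singleton] at hx; exact hx ▸ hsrcR)
      (by rw [hseen0]; exact List.nodup_singleton _)
      (fun _ => by
        rw [hseen0]
        intro hmem
        rw [List.mem_singleton] at hmem
        exact hst hmem.symm)
      (by rw [hseen0]; simp)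
    rcases hres : pvDfsB n r snk (n.toNat + 1) src (PySem.Set.add PySem.Set.empty src)
      with ⟨ob, seenX⟩
    cases ob with
    | none =>
      obtain ⟨d1, d2, d3, d4, d5, d6⟩ := hdfs.2 seenX hres
      have hFF : pvFFB n src snk (fuel + 1) r fl = fl := by
        rw [pvFFB, hres]
      rw [hFF]
      set S : Finset Int := (pvIcc n).filter (fun v => v ∈ seenX) with hSdef
      have hSsub : S ⊆ pvIcc n := Finset.filter_subset _ _
      have hsS : src ∈ S := Finset.mem_filter.mpr
        ⟨hsrcI, by simpa using d1 src (by rw [hseen0]; exact List.mem_singleton_self _)⟩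
      have htS : snk ∉ S := by
        intro h
        exact d5 (by simpa using (Finset.mem_filter.mp h).2)
      have hclosedS : ∀ w ∈ seenX, ∀ v : Int, pvInR n v → 0 < r.getD (w, v) 0 → v ∈ seenX := by
        intro w hw v hvR hpos
        by_cases hws : w = src
        · exact d6 w (Or.inr hws) v hvR hpos
        · refine d6 w (Or.inl ⟨hw, ?_⟩) v hvR hpos
          rw [hseen0]
          intro hmem
          rw [List.mem_singleton] at hmem
          exact hws hmem
      have hzero : ∀ u ∈ S, ∀ v ∈ pvIcc n \ S, r.getD (u, v) 0 = 0 := by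
        intro u hu v hv
        obtain ⟨huI, huseen⟩ := Finset.mem_filter.mp hu
        obtain ⟨hvI, hvS⟩ := Finset.mem_sdiff.mp hv
        have h2 : 0 ≤ r.getD (u, v) 0 := hV.2.1 u huI v hvI
        by_contra hne
        have hpos : 0 < r.getD (u, v) 0 := by omega
        have := hclosedS u (by simpa using huseen) v (pv_mem_Icc.mp hvI) hpos
        exact hvS (Finset.mem_filter.mpr ⟨hvI, by simpa using this⟩)
      refine ⟨⟨fun u v => r.getD (u, v) 0, hV⟩, ?_⟩
      intro y ρ' hV'
      have h1 := pv_value_eq_cap hV S hSsub hsS hsnkI htS hzero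
      have h2 := pv_value_le hV' S hSsub hsS hsnkI htS
      omega
    | some p =>
      obtain ⟨hhead, hlast, hnd, hrange, hpos, _⟩ := hdfs.1 p seenX hres
      set pairs0 := p.zip (PySem.List.slice p (some 1) none) with hpairs0def
      have hpairs0 : pairs0 = pvPairs p := by
        rw [hpairs0def, PySem.List.slice_from_one]
        rfl
      set pf := ((pairs0.map (fun pr => r.getD pr 0)).min?).getD 0 with hpfdef
      have hFF : pvFFB n src snk (fuel + 1) r fl
          = pvFFB n src snk fuel (pvUpdR pf pairs0 r) (fl + pf) := by
        rw [pvFFB, hres]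
      rw [hFF]
      have hpairs_ne : pvPairs p ≠ [] := by
        cases p with
        | nil => simp at hhead
        | cons a l =>
          cases l with
          | nil =>
            have ha : a = src := by simpa using hhead
            have hb : a = snk := by simpa using hlast
            exact absurd (ha ▸ hb) hst
          | cons b l2 => rw [pvPairs_cons_cons]; simp
      obtain ⟨m, hm⟩ : ∃ m, ((pvPairs p).map (fun pr => r.getD pr 0)).min? = some m := by
        cases hmm : ((pvPairs p).map (fun pr => r.getD pr 0)).min? with
        | none =>
          rw [List.min?_eq_none_iff] at hmm
          simp at hmm
          exact absurd hmm hpairs_ne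
        | some m => exact ⟨m, rfl⟩
      obtain ⟨hmmem, hmle⟩ := List.min?_eq_some_iff.mp hm
      obtain ⟨e0, he0, he0v⟩ := List.mem_map.mp hmmem
      have hm1 : 1 ≤ m := by
        have := hpos e0 he0
        omega
      have hpfm : pf = m := by rw [hpfdef, hpairs0, hm]; rfl
      have hupd := pv_updR_spec pf p hnd r
      have hV' : pvValid n c src snk
          (fun u v => (pvUpdR pf pairs0 r).getD (u, v) 0) (fl + pf) := by
        rw [hpairs0]
        refine pv_aug hV hnd (fun x hx => pv_mem_Icc.mpr (hrange x hx)) hhead hlast hst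
          (by omega) ?_ ?_
        · intro e he
          have hle := hmle (r.getD e 0) (List.mem_map.mpr ⟨e, he, rfl⟩)
          have hee : r.getD e 0 = r.getD (e.1, e.2) 0 := rfl
          show pf ≤ r.getD (e.1, e.2) 0
          omega
        · intro u hu v hv
          exact hupd (u, v)
      refine ihf (pvUpdR pf pairs0 r) (fl + pf) hV' ?_
      push_cast
      push_cast at hfuel
      omega


-- ---------- the two reference flows agree (max-flow is unique) ----------

theorem pv_flows_agree (n : Int) (edges : List (Int × Int × Int)) (src snk : Int)
    (hrange : ∀ e ∈ edges, pvInR n e.1 ∧ pvInR n e.2.1)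
    (hcap : ∀ e ∈ edges, 0 ≤ e.2.2)
    (hsrcR : pvInR n src) (hsnkR : pvInR n snk) (hst : src ≠ snk) :
    pvEkA n src snk (2 * edges.foldl (fun a e => a + e.2.2.natAbs) 0 + 1) (pvBuildG n edges) 0
      = pvFFB n src snk (2 * edges.foldl (fun a e => a + e.2.2.natAbs) 0 + 1)
          (pvBuildR edges) 0 := by
  set c : Int → Int → Int := fun u v => (pvBuildR edges).getD (u, v) 0 with hcdef
  have hc : ∀ u ∈ pvIcc n, ∀ v ∈ pvIcc n, 0 ≤ c u v :=
    fun u _ v _ => pv_c_nonneg edges hcap (u, v)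
  have hsrcI := pv_mem_Icc.mpr hsrcR
  have hsnkI := pv_mem_Icc.mpr hsnkR
  have hbuild := pv_build_rel n edges hrange
  have hV0B : pvValid n c src snk (fun u v => (pvBuildR edges).getD (u, v) 0) 0 :=
    pv_valid_init n c src snk hc
  have hV0A : pvValid n c src snk (fun u v => pvMatG (pvBuildG n edges) u v) 0 :=
    pv_valid_congr hsnkI
      (fun u hu v hv => (hbuild.2 u v (pv_mem_Icc.mp hu) (pv_mem_Icc.mp hv)).symm) hV0B
  have hTC : (∑ u ∈ pvIcc n, ∑ v ∈ pvIcc n, c u v) = pvTC n edges := rfl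
  have hfb : (∑ u ∈ pvIcc n, ∑ v ∈ pvIcc n, c u v) - 0
      < ((2 * edges.foldl (fun a e => a + e.2.2.natAbs) 0 + 1 : Nat) : Int) := by
    rw [hTC]
    have h2' : (edges.foldl (fun a e => a + e.2.2.natAbs) 0)
        = (edges.map (fun e => e.2.2.natAbs)).sum := by
      simpa using pv_foldl_natAbs edges 0
    rw [h2']
    have h1 := pv_TC_le n edges
    have h6 : (0:Int) ≤ (List.map (fun e => (e.2.2.natAbs : Int)) edges).sum := by
      refine List.sum_nonneg ?_
      intro x hx
      obtain ⟨e, _, rfl⟩ := List.mem_map.mp hx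
      positivity
    push_cast
    rw [List.map_map]
    simp only [Function.comp_def]
    omega
  exact pvIsMax_unique
    (pv_ekA_isMax n c src snk hsrcI hsnkI hst hc _ (pvBuildG n edges) 0 hbuild.1 hV0A hfb)
    (pv_ffB_isMax n c src snk hsrcI hsnkI hst hc _ (pvBuildR edges) 0 hV0B hfb)

-- ---------- shape of the two programs ----------

-- A's cut value, in the Set-fold wording shared by both shape lemmas
def pvCut (S T : List Int) (edges : List (Int × Int × Int)) : Int :=
  edges.foldl (fun acc e =>
    if PySem.Set.contains (PySem.Set.ofList S) e.1
        && PySem.Set.contains (PySem.Set.ofList T) e.2.1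
      then acc + e.2.2 else acc) 0

theorem pv_A_guards (n source sink : Int) (S T : List Int) (hcp : pvCP n source sink S T) :
    PySem.Set.equal (PySem.Set.union (PySem.Set.ofList S) (PySem.Set.ofList T))
        (PySem.Set.ofList (PySem.List.pyRange 0 n 1)) = true
    ∧ (PySem.Set.inter (PySem.Set.ofList S) (PySem.Set.ofList T) == ([] : List Int)) = true
    ∧ S.contains source = true ∧ T.contains sink = true := by
  obtain ⟨he, hi, hs, ht⟩ := (pv_A_pass_iff n source sink S T).mpr hcp
  exact ⟨he, by simpa using hi, by simpa using hs, by simpa using ht⟩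

theorem pv_A_shape_pass (n : Int) (edges : List (Int × Int × Int)) (source sink mf : Int)
    (S T : List Int) (ce : List (Int × Int))
    (hcp : pvCP n source sink S T) (hcut : pvCut S T edges = mf) :
    SPEC n edges source sink (mf, S, T, ce)
      = (mf == pvEkA n source sink
          (2 * edges.foldl (fun a e => a + e.2.2.natAbs) 0 + 1) (pvBuildG n edges) 0) := by
  obtain ⟨h1, h2, h3, h4⟩ := pv_A_guards n source sink S T hcp
  have hcut' : (pvCut S T edges == mf) = true := by simpa using hcut
  simp only [SPEC]
  rw [show (PySem.List.pyRange 0 n 1 : PySem.Set Int)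
      = PySem.Set.ofList (PySem.List.pyRange 0 n 1) from
    (PySem.Set.ofList_eq_self_of_nodup _ (PySem.List.nodup_pyRange_one 0 n)).symm]
  rw [h1, Bool.not_true, if_neg Bool.false_ne_true,
    h2, Bool.not_true, if_neg Bool.false_ne_true,
    h3, h4, Bool.not_true, Bool.or_self, if_neg Bool.false_ne_true]
  rw [pv_cut_eq (PySem.Set.ofList S) (PySem.Set.ofList T) edges]
  rw [show edges.foldl (fun acc e =>
      if PySem.Set.contains (PySem.Set.ofList S) e.1
          && PySem.Set.contains (PySem.Set.ofList T) e.2.1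
        then acc + e.2.2 else acc) 0 = pvCut S T edges from rfl]
  rw [hcut', Bool.not_true, if_neg Bool.false_ne_true]
  rcases hmf : (mf == pvEkA n source sink
      (2 * edges.foldl (fun a e => a + e.2.2.natAbs) 0 + 1) (pvBuildG n edges) 0) with _ | _
  · rw [Bool.not_false, if_pos rfl]
  · rw [Bool.not_true, if_neg Bool.false_ne_true]

theorem pv_A_shape_fail (n : Int) (edges : List (Int × Int × Int)) (source sink mf : Int)
    (S T : List Int) (ce : List (Int × Int))
    (h : ¬(pvCP n source sink S T ∧ pvCut S T edges = mf)) :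
    SPEC n edges source sink (mf, S, T, ce) = false := by
  simp only [SPEC]
  rw [show (PySem.List.pyRange 0 n 1 : PySem.Set Int)
      = PySem.Set.ofList (PySem.List.pyRange 0 n 1) from
    (PySem.Set.ofList_eq_self_of_nodup _ (PySem.List.nodup_pyRange_one 0 n)).symm]
  by_cases h1 : PySem.Set.equal (PySem.Set.union (PySem.Set.ofList S) (PySem.Set.ofList T))
      (PySem.Set.ofList (PySem.List.pyRange 0 n 1)) = true
  case neg =>
    rw [Bool.not_eq_true] at h1
    rw [h1, Bool.not_false, if_pos rfl]
  rw [h1, Bool.not_true, if_neg Bool.false_ne_true]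
  by_cases h2 : (PySem.Set.inter (PySem.Set.ofList S) (PySem.Set.ofList T) == ([] : List Int)) = true
  case neg =>
    rw [Bool.not_eq_true] at h2
    rw [h2, Bool.not_false, if_pos rfl]
  rw [h2, Bool.not_true, if_neg Bool.false_ne_true]
  by_cases h3 : (!(S.contains source) || !(T.contains sink)) = true
  case pos => rw [h3, if_pos rfl]
  rw [Bool.not_eq_true] at h3
  rw [h3, if_neg Bool.false_ne_true]
  have hsrc : source ∈ S := by
    rcases Bool.or_eq_false_iff.mp h3 with ⟨ha, _⟩
    simpa using ha
  have hsnk : sink ∈ T := by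
    rcases Bool.or_eq_false_iff.mp h3 with ⟨_, hb⟩
    simpa using hb
  have hcp : pvCP n source sink S T :=
    (pv_A_pass_iff n source sink S T).mp ⟨h1, by simpa using h2, hsrc, hsnk⟩
  have hcut : pvCut S T edges ≠ mf := fun hc => h ⟨hcp, hc⟩
  have hcut' : (pvCut S T edges == mf) = false := by simpa using hcut
  rw [pv_cut_eq (PySem.Set.ofList S) (PySem.Set.ofList T) edges]
  rw [show edges.foldl (fun acc e =>
      if PySem.Set.contains (PySem.Set.ofList S) e.1
          && PySem.Set.contains (PySem.Set.ofList T) e.2.1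
        then acc + e.2.2 else acc) 0 = pvCut S T edges from rfl]
  rw [hcut', Bool.not_false, if_pos rfl]

theorem pv_B_guards (n source sink : Int) (S T : List Int) (hcp : pvCP n source sink S T) :
    PySem.Set.isdisjoint (PySem.Set.ofList S) (PySem.Set.ofList T) = true
    ∧ (!((PySem.Set.len (PySem.Set.union (PySem.Set.ofList S) (PySem.Set.ofList T)) : Int) == n)
        || (PySem.Set.union (PySem.Set.ofList S) (PySem.Set.ofList T)).any
            (fun x => !(decide (0 ≤ x) && decide (x < n)))) = false
    ∧ PySem.Set.contains (PySem.Set.ofList S) source = true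
    ∧ PySem.Set.contains (PySem.Set.ofList T) sink = true := by
  obtain ⟨hd, hl, ha, hs, ht⟩ := (pv_B_pass_iff n source sink S T).mpr hcp
  refine ⟨hd, ?_, hs, ht⟩
  rw [Bool.or_eq_false_iff]
  exact ⟨by simpa using hl, ha⟩

theorem pv_B_shape_pass (n : Int) (edges : List (Int × Int × Int)) (source sink mf : Int)
    (S T : List Int) (ce : List (Int × Int))
    (hcp : pvCP n source sink S T) (hcut : pvCut S T edges = mf) :
    SPEC_alt n edges source sink (mf, S, T, ce)
      = (pvFFB n source sink
          (2 * edges.foldl (fun a e => a + e.2.2.natAbs) 0 + 1) (pvBuildR edges) 0 == mf) := by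
  obtain ⟨h1, h2, h3, h4⟩ := pv_B_guards n source sink S T hcp
  have hcut' : (pvCut S T edges == mf) = true := by simpa using hcut
  simp only [SPEC_alt]
  rw [h1, Bool.not_true, if_neg Bool.false_ne_true,
    h2, if_neg Bool.false_ne_true,
    h3, h4, Bool.not_true, Bool.or_self, if_neg Bool.false_ne_true]
  rw [show edges.foldl (fun acc e =>
      if PySem.Set.contains (PySem.Set.ofList S) e.1
          && PySem.Set.contains (PySem.Set.ofList T) e.2.1
        then acc + e.2.2 else acc) 0 = pvCut S T edges from rfl]
  rw [hcut', Bool.not_true, if_neg Bool.false_ne_true]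

theorem pv_B_shape_fail (n : Int) (edges : List (Int × Int × Int)) (source sink mf : Int)
    (S T : List Int) (ce : List (Int × Int))
    (h : ¬(pvCP n source sink S T ∧ pvCut S T edges = mf)) :
    SPEC_alt n edges source sink (mf, S, T, ce) = false := by
  simp only [SPEC_alt]
  by_cases h1 : PySem.Set.isdisjoint (PySem.Set.ofList S) (PySem.Set.ofList T) = true
  case neg =>
    rw [Bool.not_eq_true] at h1
    rw [h1, Bool.not_false, if_pos rfl]
  rw [h1, Bool.not_true, if_neg Bool.false_ne_true]
  by_cases h2 : (!((PySem.Set.len (PySem.Set.union (PySem.Set.ofList S) (PySem.Set.ofList T)) : Int) == n)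
      || (PySem.Set.union (PySem.Set.ofList S) (PySem.Set.ofList T)).any
          (fun x => !(decide (0 ≤ x) && decide (x < n)))) = true
  case pos => rw [h2, if_pos rfl]
  rw [Bool.not_eq_true] at h2
  rw [h2, if_neg Bool.false_ne_true]
  by_cases h3 : (!(PySem.Set.contains (PySem.Set.ofList S) source)
      || !(PySem.Set.contains (PySem.Set.ofList T) sink)) = true
  case pos => rw [h3, if_pos rfl]
  rw [Bool.not_eq_true] at h3
  rw [h3, if_neg Bool.false_ne_true]
  have hparts := Bool.or_eq_false_iff.mp h2
  have hmems := Bool.or_eq_false_iff.mp h3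
  have hcp : pvCP n source sink S T := by
    refine (pv_B_pass_iff n source sink S T).mp
      ⟨h1, by simpa using hparts.1, hparts.2, by simpa using hmems.1, by simpa using hmems.2⟩
  have hcut : pvCut S T edges ≠ mf := fun hc => h ⟨hcp, hc⟩
  have hcut' : (pvCut S T edges == mf) = false := by simpa using hcut
  rw [show edges.foldl (fun acc e =>
      if PySem.Set.contains (PySem.Set.ofList S) e.1
          && PySem.Set.contains (PySem.Set.ofList T) e.2.1
        then acc + e.2.2 else acc) 0 = pvCut S T edges from rfl]
  rw [hcut', Bool.not_false, if_pos rfl]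

-- ===== VERDICT (by name: the statement is the Claim_ definition above) =====
theorem SPEC_spec : Claim_equal_SPEC := by
  unfold Claim_equal_SPEC
  intro n edges source sink result hDom hPre
  unfold Spec_SPEC
  obtain ⟨mf, S, T, ce⟩ := result
  by_cases hc : pvCP n source sink S T ∧ pvCut S T edges = mf
  case neg =>
    rw [pv_A_shape_fail n edges source sink mf S T ce hc,
      pv_B_shape_fail n edges source sink mf S T ce hc]
  obtain ⟨hcp, hcut⟩ := hc
  rw [pv_A_shape_pass n edges source sink mf S T ce hcp hcut,
    pv_B_shape_pass n edges source sink mf S T ce hcp hcut]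
  -- Pre_ gives in-range endpoints and nonnegative capacities once the checks pass
  have hpre : ∀ e ∈ edges, 0 ≤ e.1 ∧ e.1 < n ∧ 0 ≤ e.2.1 ∧ e.2.1 < n ∧ 0 ≤ e.2.2 := by
    apply hPre
    refine ⟨hcp.1, hcp.2.1, hcp.2.2.1, hcp.2.2.2.1, hcp.2.2.2.2, ?_⟩
    rw [← pv_cut_pre_eq S T edges 0]
    exact hcut
  have hrange : ∀ e ∈ edges, pvInR n e.1 ∧ pvInR n e.2.1 := by
    intro e he
    obtain ⟨a1, a2, a3, a4, _⟩ := hpre e he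
    exact ⟨⟨a1, a2⟩, ⟨a3, a4⟩⟩
  have hcap : ∀ e ∈ edges, 0 ≤ e.2.2 := fun e he => (hpre e he).2.2.2.2
  have hsrcR : pvInR n source :=
    ⟨(hcp.1 source hcp.2.2.2.1).1, (hcp.1 source hcp.2.2.2.1).2.1⟩
  have hsnkR : pvInR n sink := hcp.2.1 sink hcp.2.2.2.2
  have hne : source ≠ sink := fun h =>
    (hcp.1 source hcp.2.2.2.1).2.2 (h ▸ hcp.2.2.2.2)
  have hflow := pv_flows_agree n edges source sink hrange hcap hsrcR hsnkR hne
  rw [hflow, Bool.eq_iff_iff]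
  simp only [beq_iff_eq]
  exact eq_comm
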